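-- pv_equiv track=rewrite | github.com/cizins/2026-python | weeks/week-07/solutions/1114405042/solution_10093.py | solve
-- ===== SOURCE A (Python) =====
-- def solve(n: int, m: int, grid: list[str]) -> int:
--     """
--     計算最多能部署的炮兵數量 (標準狀態壓縮 DP 解法)。
--     """
--     if n == 0 or m == 0:
--         return 0
--
--     # 預處理地形：把地形轉換為二進位遮罩。1 代表山地 (H)，0 代表平原 (P)
--     # 這樣只要 (state & mountains[i]) != 0 就代表炮兵放在了山地上，這是不合法的。
--     mountains = []
--     for row in grid:
--         mask = 0
--         for i in range(m):
--             if row[i] == 'H':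
--                 mask |= (1 << i)
--         mountains.append(mask)
--
--     # 預處理所有單行合法的狀態 (左右不互相攻擊)
--     valid_states = []
--     state_counts = []
--     for i in range(1 << m):
--         if (i & (i << 1)) == 0 and (i & (i << 2)) == 0:
--             valid_states.append(i)
--             # 計算這個狀態放了幾個炮兵 (二進位中 1 的數量)
--             state_counts.append(bin(i).count('1'))
--
--     num_states = len(valid_states)
--
--     # 建立 DP 陣列: dp[i][j][k]
--     # i: 考慮到第 i 行 (0 ~ n-1)
--     # j: 第 i 行的狀態索引 (0 ~ num_states-1)
--     # k: 第 i-1 行的狀態索引 (0 ~ num_states-1)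
--     dp = [[[0] * num_states for _ in range(num_states)] for _ in range(n)]
--
--     # Base Case: 第 0 行
--     for j in range(num_states):
--         if (valid_states[j] & mountains[0]) == 0:
--             dp[0][j][0] = state_counts[j]
--
--     # Base Case: 第 1 行 (如果有)
--     if n > 1:
--         for j in range(num_states):
--             if (valid_states[j] & mountains[1]) != 0:
--                 continue
--             for k in range(num_states):
--                 if (valid_states[k] & mountains[0]) != 0:
--                     continue
--                 # 第 1 行與第 0 行不能互相攻擊
--                 if (valid_states[j] & valid_states[k]) == 0:
--                     dp[1][j][k] = max(dp[1][j][k], dp[0][k][0] + state_counts[j])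
--
--     # 狀態轉移: 第 2 行到第 n-1 行
--     for i in range(2, n):
--         for j in range(num_states):
--             if (valid_states[j] & mountains[i]) != 0:
--                 continue
--             for k in range(num_states):
--                 if (valid_states[k] & mountains[i-1]) != 0:
--                     continue
--                 if (valid_states[j] & valid_states[k]) != 0:
--                     continue
--                 for l in range(num_states):
--                     if (valid_states[l] & mountains[i-2]) != 0:
--                         continue
--                     # 檢查這三行兩兩之間是否會互相攻擊
--                     if (valid_states[j] & valid_states[l]) != 0:
--                         continue
--                     if (valid_states[k] & valid_states[l]) != 0:
--                         continue
--
--                     dp[i][j][k] = max(dp[i][j][k], dp[i-1][k][l] + state_counts[j])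
--
--     # 在最後一行中找出最大值
--     ans = 0
--     for j in range(num_states):
--         for k in range(num_states):
--             ans = max(ans, dp[n-1][j][k])
--
--     return ans
-- ===== SOURCE B (Python) =====
-- def solve(n: int, m: int, grid: list[str]) -> int:
--     """Top-down memoized recursion over the DP recurrence: best(i, j, k) is the
--     best total for rows 0..i with row i in state j and row i-1 in state k
--     (k == 0 is the virtual empty row above row 0); no DP table is allocated,
--     values are demanded from the answer downwards and cached in a dict."""
--     if n == 0 or m == 0:
--         return 0
--     mountains = []
--     for row in grid:
--         mask = 0
--         for i in range(m):
--             if row[i] == 'H':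
--                 mask |= (1 << i)
--         mountains.append(mask)
--     states = []
--     counts = []
--     for s in range(1 << m):
--         if (s & (s << 1)) == 0 and (s & (s << 2)) == 0:
--             states.append(s)
--             counts.append(bin(s).count('1'))
--     S = len(states)
--     memo = {}
--
--     def best(i, j, k):
--         key = (i, j, k)
--         if key in memo:
--             return memo[key]
--         if i == 0:
--             v = counts[j] if k == 0 and (states[j] & mountains[0]) == 0 else 0
--         elif (states[j] & mountains[i]) != 0 or (states[k] & mountains[i - 1]) != 0 \
--                 or (states[j] & states[k]) != 0:
--             v = 0
--         else:
--             cands = [best(i - 1, k, l) + counts[j]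
--                      for l in range(S)
--                      if ((states[l] & mountains[i - 2]) == 0 if i >= 2 else l == 0)
--                      and (states[j] & states[l]) == 0
--                      and (states[k] & states[l]) == 0]
--             v = max(cands, default=0)
--         memo[key] = v
--         return v
--
--     return max(best(n - 1, j, k) for j in range(S) for k in range(S))
-- ===== Notes on version B (the rewrite author's own statement) =====
-- stated objective: alternative
-- what changed: Replaces A's bottom-up 3D dp[n][S][S] table filled by four nested index loops with a demand-driven top-down recursion best(i, j, k) memoized in a dict: no table is allocated, values are computed recursively from the answer row downwards with a virtual empty row above row 0 unifying A's two hand-written base cases.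
import Mathlib
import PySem

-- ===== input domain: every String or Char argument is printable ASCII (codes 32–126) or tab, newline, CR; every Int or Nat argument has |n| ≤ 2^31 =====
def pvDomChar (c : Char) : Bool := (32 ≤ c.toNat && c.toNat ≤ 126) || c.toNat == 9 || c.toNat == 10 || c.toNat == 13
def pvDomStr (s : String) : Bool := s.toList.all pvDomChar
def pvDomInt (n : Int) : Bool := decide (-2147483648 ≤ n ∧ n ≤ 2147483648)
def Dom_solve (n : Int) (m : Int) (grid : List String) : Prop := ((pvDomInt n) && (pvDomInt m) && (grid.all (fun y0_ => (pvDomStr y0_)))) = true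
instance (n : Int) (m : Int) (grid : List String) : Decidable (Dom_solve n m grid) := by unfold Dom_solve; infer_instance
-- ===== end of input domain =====

-- B replaces A's bottom-up 3D table (four nested index loops) by a demand-driven top-down
-- recursion best(i, j, k) memoized in a dict, with a virtual empty row above row 0 unifying
-- A's two hand-written base cases; same asymptotic cost (objective: alternative decomposition).

-- ===== shared helpers (identical preprocessing code in Source A and Source B) =====

-- xs[i] for an index known to be in range inside Pre_ (both Pythons only index in range there)
def pvIx (xs : List Int) (i : Int) : Int := PySem.List.pyGetD xs i 0

-- the terrain-mask loop (identical in both Pythons); row[i] via Str.pyGet?, 1 << i via <<< (i ≥ 0 from range)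
def pvMask (m : Int) (row : String) : Int :=
  (PySem.List.pyRange 0 m 1).foldl
    (fun mask i => if PySem.Str.pyGet? row i = some 'H' then PySem.Int.bor mask (1 <<< i.toNat) else mask) 0

-- the valid-states loop (identical in both Pythons); bin(s).count('1') is PySem.Int.bitCount (s ≥ 0 here)
def pvStates (m : Int) : List Int × List Int :=
  (PySem.List.pyRange 0 (1 <<< m.toNat) 1).foldl
    (fun p s =>
      if PySem.Int.band s (s <<< 1) = 0 ∧ PySem.Int.band s (s <<< 2) = 0 then
        (p.1 ++ [s], p.2 ++ [(PySem.Int.bitCount s : Int)])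
      else p)
    ([], [])

-- ===== PORT A =====

-- dp[i][j][k] read/write; exact for the in-range indices A uses inside Pre_
def pvGet3 (dp : List (List (List Int))) (i j k : Int) : Int :=
  PySem.List.pyGetD (PySem.List.pyGetD (PySem.List.pyGetD dp i []) j []) k 0

def pvSet3 (dp : List (List (List Int))) (i j k : Int) (v : Int) : List (List (List Int)) :=
  PySem.List.pySetD dp i
    (PySem.List.pySetD (PySem.List.pyGetD dp i []) j
      (PySem.List.pySetD (PySem.List.pyGetD (PySem.List.pyGetD dp i []) j []) k v))

-- the i-th iteration (i ≥ 2) of A's transition loop: the j/k/l nest with its continue-guards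
def pvStep2 (states counts mountains : List Int) (dp : List (List (List Int))) (i : Int) :
    List (List (List Int)) :=
  let S : Int := PySem.List.len states
  (PySem.List.pyRange 0 S 1).foldl (fun dp j =>
    if ¬ PySem.Int.band (pvIx states j) (pvIx mountains i) = 0 then dp else
    (PySem.List.pyRange 0 S 1).foldl (fun dp k =>
      if ¬ PySem.Int.band (pvIx states k) (pvIx mountains (i - 1)) = 0 then dp else
      if ¬ PySem.Int.band (pvIx states j) (pvIx states k) = 0 then dp else
      (PySem.List.pyRange 0 S 1).foldl (fun dp l =>
        if ¬ PySem.Int.band (pvIx states l) (pvIx mountains (i - 2)) = 0 then dp else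
        if ¬ PySem.Int.band (pvIx states j) (pvIx states l) = 0 then dp else
        if ¬ PySem.Int.band (pvIx states k) (pvIx states l) = 0 then dp else
        pvSet3 dp i j k (max (pvGet3 dp i j k) (pvGet3 dp (i - 1) k l + pvIx counts j))) dp) dp) dp

def solve (n : Int) (m : Int) (grid : List String) : Int :=
  if n = 0 ∨ m = 0 then 0
  else
    let mountains := grid.foldl (fun acc row => acc ++ [pvMask m row]) ([] : List Int)
    let p := pvStates m
    let states := p.1
    let counts := p.2
    let S : Int := PySem.List.len states
    let dp0 : List (List (List Int)) :=
      (PySem.List.pyRange 0 n 1).map (fun _ =>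
        (PySem.List.pyRange 0 S 1).map (fun _ => List.replicate S.toNat (0 : Int)))
    let dp1 := (PySem.List.pyRange 0 S 1).foldl (fun dp j =>
        if PySem.Int.band (pvIx states j) (pvIx mountains 0) = 0 then
          pvSet3 dp 0 j 0 (pvIx counts j)
        else dp) dp0
    let dp2 := if 1 < n then
        (PySem.List.pyRange 0 S 1).foldl (fun dp j =>
          if ¬ PySem.Int.band (pvIx states j) (pvIx mountains 1) = 0 then dp else
          (PySem.List.pyRange 0 S 1).foldl (fun dp k =>
            if ¬ PySem.Int.band (pvIx states k) (pvIx mountains 0) = 0 then dp else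
            if PySem.Int.band (pvIx states j) (pvIx states k) = 0 then
              pvSet3 dp 1 j k (max (pvGet3 dp 1 j k) (pvGet3 dp 0 k 0 + pvIx counts j))
            else dp) dp) dp1
      else dp1
    let dp3 := (PySem.List.pyRange 2 n 1).foldl (pvStep2 states counts mountains) dp2
    (PySem.List.pyRange 0 S 1).foldl (fun a j =>
      (PySem.List.pyRange 0 S 1).foldl (fun a k => max a (pvGet3 dp3 (n - 1) j k)) a) 0

-- ===== PORT B =====

-- Source B's memoized recursion best(i, j, k), with the memo dict threaded explicitly
-- (Python mutates one dict in place; threading it through calls is the same computation).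
-- B only ever calls it with i ≥ 0, so the Int row index is carried as the Nat recursion depth
-- and re-cast to Int for the dict key exactly as Python keys the tuple (i, j, k).
def pvBest (states counts mountains : List Int) :
    Nat → Int → Int → PySem.Dict (Int × Int × Int) Int →
      Int × PySem.Dict (Int × Int × Int) Int
  | 0, j, k, memo =>
    match memo.get? ((0 : Int), j, k) with
    | some v => (v, memo)
    | none =>
      let v := if k = 0 ∧ PySem.Int.band (pvIx states j) (pvIx mountains 0) = 0
               then pvIx counts j else 0
      (v, memo.insert ((0 : Int), j, k) v)
  | r + 1, j, k, memo =>
    match memo.get? (((r : Int) + 1), j, k) with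
    | some v => (v, memo)
    | none =>
      if PySem.Int.band (pvIx states j) (pvIx mountains ((r : Int) + 1)) = 0 ∧
          PySem.Int.band (pvIx states k) (pvIx mountains ((r : Int) + 1 - 1)) = 0 ∧
          PySem.Int.band (pvIx states j) (pvIx states k) = 0 then
        let p := (PySem.List.pyRange 0 (PySem.List.len states) 1).foldl
          (fun (p : List Int × PySem.Dict (Int × Int × Int) Int) l =>
            if (if 2 ≤ (r : Int) + 1 then
                  PySem.Int.band (pvIx states l) (pvIx mountains ((r : Int) + 1 - 2)) = 0
                else l = 0) ∧
                PySem.Int.band (pvIx states j) (pvIx states l) = 0 ∧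
                PySem.Int.band (pvIx states k) (pvIx states l) = 0 then
              let q := pvBest states counts mountains r k l p.2
              (p.1 ++ [q.1 + pvIx counts j], q.2)
            else p) ([], memo)
        let v := PySem.List.maxD p.1 id 0
        (v, p.2.insert (((r : Int) + 1), j, k) v)
      else (0, memo.insert (((r : Int) + 1), j, k) 0)

def solve_alt (n : Int) (m : Int) (grid : List String) : Int :=
  if n = 0 ∨ m = 0 then 0
  else
    let mountains := grid.foldl (fun acc row => acc ++ [pvMask m row]) ([] : List Int)
    let p := pvStates m
    let states := p.1
    let counts := p.2
    let S : Int := PySem.List.len states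
    -- max(best(n-1, j, k) for j in range(S) for k in range(S)): the generator's values are
    -- collected left to right threading the memo; inside Pre_ S ≥ 1, so the list is nonempty
    -- and Python's max over it is max?.getD (the default is never reached there)
    let q := (PySem.List.pyRange 0 S 1).foldl
      (fun (q : List Int × PySem.Dict (Int × Int × Int) Int) j =>
        (PySem.List.pyRange 0 S 1).foldl
          (fun (q : List Int × PySem.Dict (Int × Int × Int) Int) k =>
            let r := pvBest states counts mountains (n - 1).toNat j k q.2
            (q.1 ++ [r.1], r.2)) q)
      (([], PySem.Dict.empty))
    (PySem.List.max? q.1 id).getD 0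

-- ===== PRECONDITION & SPEC =====
-- Pre_ excludes exactly the inputs where the Python A raises: with n = 0 or m = 0 A returns 0 at
-- once; otherwise negative n or m (ValueError/IndexError), a grid with fewer than n rows, or any
-- row shorter than m characters (IndexError) are excluded.
def Pre_solve (n : Int) (m : Int) (grid : List String) : Prop :=
  n = 0 ∨ m = 0 ∨
    (0 < n ∧ 0 < m ∧ n ≤ (grid.length : Int) ∧ ∀ row ∈ grid, m ≤ (row.toList.length : Int))
instance (n : Int) (m : Int) (grid : List String) : Decidable (Pre_solve n m grid) := by
  unfold Pre_solve; infer_instance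

def pvWitness_solve : Int × Int × List String := (3, 4, ["PHPH", "PPPP", "HHPP"])

def Spec_solve (n : Int) (m : Int) (grid : List String) (out : Int) : Prop := out = solve_alt n m grid
instance (n : Int) (m : Int) (grid : List String) (out : Int) : Decidable (Spec_solve n m grid out) := by
  unfold Spec_solve; infer_instance

-- ===== CLAIM (what is proved, stated in full; the proofs are below) =====
def Claim_equal_solve : Prop := ∀ (n : Int) (m : Int) (grid : List String),
  Dom_solve n m grid → Pre_solve n m grid → Spec_solve n m grid (solve n m grid)

-- ===== LEMMAS AND PROOFS =====

-- the common DP value: row r's best total at (state index j, previous-row state index k);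
-- the virtual empty row above row 0 appears as the 'l = 0' branch at r = 1
def pvL (states counts mountains : List Int) : Nat → Int → Int → Int
  | 0, j, k =>
      if k = 0 ∧ PySem.Int.band (pvIx states j) (pvIx mountains 0) = 0 then pvIx counts j else 0
  | r + 1, j, k =>
      if PySem.Int.band (pvIx states j) (pvIx mountains ((r : Int) + 1)) = 0 ∧
          PySem.Int.band (pvIx states k) (pvIx mountains ((r : Int) + 1 - 1)) = 0 ∧
          PySem.Int.band (pvIx states j) (pvIx states k) = 0 then
        PySem.List.maxD
          (((PySem.List.pyRange 0 (PySem.List.len states) 1).filter (fun l =>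
              decide ((if 2 ≤ (r : Int) + 1 then
                  PySem.Int.band (pvIx states l) (pvIx mountains ((r : Int) + 1 - 2)) = 0
                else l = 0) ∧
                PySem.Int.band (pvIx states j) (pvIx states l) = 0 ∧
                PySem.Int.band (pvIx states k) (pvIx states l) = 0))).map
            (fun l => pvL states counts mountains r k l + pvIx counts j))
          id 0
      else 0

def pvDims (dp : List (List (List Int))) (N S : Nat) : Prop :=
  dp.length = N ∧ ∀ row ∈ dp, row.length = S ∧ ∀ r ∈ row, r.length = S

-- generic max / indexing facts ------------------------------------------------

lemma pv_max?_cons : ∀ (xs : List Int) (a : Int),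
    PySem.List.max? (a :: xs) id = some (xs.foldl max a) := by
  intro xs
  induction xs with
  | nil => intro a; rfl
  | cons x xs ih =>
    intro a
    have h1 : PySem.List.max? (a :: x :: xs) id = PySem.List.max? (max a x :: xs) id := by
      simp only [PySem.List.max?, List.foldl_cons]
      congr 1
      simp only [id]
      split
      next h => rw [max_eq_right (by omega)]
      next h => rw [max_eq_left (by omega)]
    rw [h1, ih, List.foldl_cons]

lemma pv_maxD_eq_foldl (xs : List Int) (h : ∀ x ∈ xs, 0 ≤ x) :
    PySem.List.maxD xs id 0 = xs.foldl max 0 := by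
  cases xs with
  | nil => rfl
  | cons x xs =>
    simp only [PySem.List.maxD, pv_max?_cons, Option.getD_some, List.foldl_cons]
    rw [max_eq_right (h x (by simp))]

lemma pv_fold_max_eq (xs : List Int) (hne : xs ≠ []) (h0 : ∀ x ∈ xs, 0 ≤ x) :
    (PySem.List.max? xs id).getD 0 = xs.foldl max 0 := by
  cases xs with
  | nil => exact absurd rfl hne
  | cons x xs =>
    rw [pv_max?_cons, Option.getD_some, List.foldl_cons, max_eq_right (h0 x (by simp))]

lemma pv_nested_max_flat (js ks : List Int) (g : Int → Int → Int) : ∀ (a : Int),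
    js.foldl (fun a j => ks.foldl (fun a k => max a (g j k)) a) a
      = (js.flatMap (fun j => ks.map (g j))).foldl max a := by
  induction js with
  | nil => intro a; simp
  | cons j js ih =>
    intro a
    simp only [List.foldl_cons, List.flatMap_cons, List.foldl_append, List.foldl_map]
    exact ih _

lemma pv_getD_set {α : Type} (xs : List α) (i j : Nat) (v d : α) (hi : i < xs.length) :
    (xs.set i v).getD j d = if j = i then v else xs.getD j d := by
  by_cases h : j = i
  · subst h; simp [List.getD_eq_getElem?_getD, List.getElem?_set, hi]
  · rw [List.getD_eq_getElem?_getD, List.getElem?_set, if_neg (by omega : ¬ i = j), ← List.getD_eq_getElem?_getD, if_neg h]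

lemma pv_getD_cases {α : Type} (xs : List α) (i : Nat) (d : α) :
    xs.getD i d = d ∨ xs.getD i d ∈ xs := by
  rcases h : xs[i]? with _ | v
  · left; simp [List.getD_eq_getElem?_getD, h]
  · right
    simp only [List.getD_eq_getElem?_getD, h, Option.getD_some]
    exact List.mem_of_getElem? h

lemma pvStates_spec (m : Int) :
    pvStates m = ((PySem.List.pyRange 0 (1 <<< m.toNat) 1).filter
        (fun s => decide (PySem.Int.band s (s <<< 1) = 0 ∧ PySem.Int.band s (s <<< 2) = 0)),
      ((PySem.List.pyRange 0 (1 <<< m.toNat) 1).filter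
        (fun s => decide (PySem.Int.band s (s <<< 1) = 0 ∧ PySem.Int.band s (s <<< 2) = 0))).map
        (fun s => (PySem.Int.bitCount s : Int))) := by
  unfold pvStates
  rw [PySem.List.foldl_congr_mem _ _
    (fun (p : List Int × List Int) s =>
      (if (fun s => decide (PySem.Int.band s (s <<< 1) = 0 ∧ PySem.Int.band s (s <<< 2) = 0)) s = true
        then p.1 ++ [s] else p.1,
       if (fun s => decide (PySem.Int.band s (s <<< 1) = 0 ∧ PySem.Int.band s (s <<< 2) = 0)) s = true
        then p.2 ++ [(PySem.Int.bitCount s : Int)] else p.2)) _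
    (by intro p s _; by_cases hc : PySem.Int.band s (s <<< 1) = 0 ∧ PySem.Int.band s (s <<< 2) = 0 <;>
        simp [hc])]
  have h2 := PySem.List.foldl_prod_mk
      (fun (a : List Int) (s : Int) =>
        if (fun s => decide (PySem.Int.band s (s <<< 1) = 0 ∧ PySem.Int.band s (s <<< 2) = 0)) s = true
          then a ++ [s] else a)
      (fun (b : List Int) (s : Int) =>
        if (fun s => decide (PySem.Int.band s (s <<< 1) = 0 ∧ PySem.Int.band s (s <<< 2) = 0)) s = true
          then b ++ [(PySem.Int.bitCount s : Int)] else b)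
      (PySem.List.pyRange 0 (1 <<< m.toNat) 1) [] []
  rw [h2, PySem.List.foldl_append_if, PySem.List.foldl_append_if]
  simp

lemma pv_states_cons (m : Int) (hm : 0 < m) :
    ∃ tl, (pvStates m).1 = 0 :: tl := by
  rw [pvStates_spec]
  have hpos : (0:Int) < 1 <<< m.toNat := by
    have : (0:Int) < 2 ^ m.toNat := by positivity
    simpa [Int.shiftLeft_eq] using this
  rw [PySem.List.pyRange_one_cons hpos]
  rw [List.filter_cons_of_pos (by decide)]
  exact ⟨_, rfl⟩

lemma pv_states_len_pos (m : Int) (hm : 0 < m) : 0 < (pvStates m).1.length := by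
  obtain ⟨tl, htl⟩ := pv_states_cons m hm
  simp [htl]

lemma pv_states_zero (m : Int) (hm : 0 < m) : pvIx (pvStates m).1 0 = 0 := by
  obtain ⟨tl, htl⟩ := pv_states_cons m hm
  rw [htl]
  simp [pvIx, PySem.List.pyGetD_zero_cons]

lemma pv_counts_nonneg (m : Int) (j : Int) : 0 ≤ pvIx (pvStates m).2 j := by
  have h : ∀ x ∈ (pvStates m).2, 0 ≤ x := by
    rw [pvStates_spec]
    intro x hx
    simp only [List.mem_map] at hx
    obtain ⟨s, _, rfl⟩ := hx
    positivity
  rcases hr : PySem.List.pyGet? (pvStates m).2 j with _ | v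
  · simp [pvIx, PySem.List.pyGetD, hr]
  · have hmem := PySem.List.mem_of_pyGet?_eq_some (pvStates m).2 hr
    have hv := h v hmem
    simp [pvIx, PySem.List.pyGetD, hr, hv]

-- at level 1 only the virtual empty previous-previous row l = 0 passes the filter
lemma pv_filter_l0 (m : Int) (hm : 0 < m) (mountains : List Int) (j k : Int) :
    ((PySem.List.pyRange 0 (PySem.List.len (pvStates m).1) 1).filter (fun l =>
        decide ((if 2 ≤ ((0:Nat) : Int) + 1 then
            PySem.Int.band (pvIx (pvStates m).1 l) (pvIx mountains (((0:Nat) : Int) + 1 - 2)) = 0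
          else l = 0) ∧
          PySem.Int.band (pvIx (pvStates m).1 j) (pvIx (pvStates m).1 l) = 0 ∧
          PySem.Int.band (pvIx (pvStates m).1 k) (pvIx (pvStates m).1 l) = 0))) = [0] := by
  have hlen := pv_states_len_pos m hm
  have hS : (0:Int) < PySem.List.len (pvStates m).1 := by
    rw [PySem.List.len_eq]; exact_mod_cast hlen
  rw [PySem.List.pyRange_one_cons hS, List.filter_cons_of_pos, List.filter_eq_nil_iff.mpr]
  · intro l hl
    rw [PySem.List.mem_pyRange_one] at hl
    simp only [decide_eq_true_eq, not_and]
    intro h1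
    rw [if_neg (by norm_num)] at h1
    omega
  · have h0 := pv_states_zero m hm
    simp only [decide_eq_true_eq, h0]
    rw [if_neg (by norm_num)]
    refine ⟨by trivial, ?_, ?_⟩
    · exact PySem.Int.band_zero _
    · exact PySem.Int.band_zero _

lemma pvL_nonneg (states counts mountains : List Int)
    (hc : ∀ (j : Int), 0 ≤ pvIx counts j) :
    ∀ (r : Nat) (j k : Int), 0 ≤ pvL states counts mountains r j k := by
  intro r
  induction r with
  | zero =>
    intro j k
    unfold pvL
    split
    · exact hc j
    · exact le_refl 0
  | succ r ih =>
    intro j k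
    unfold pvL
    split
    · rw [pv_maxD_eq_foldl]
      · exact (PySem.List.le_foldl_max _ 0).1
      · intro v hv
        simp only [List.mem_map] at hv
        obtain ⟨l, _, rfl⟩ := hv
        have := ih k l
        have := hc j
        omega
    · exact le_refl 0

-- dp-table machinery -------------------------------------------------------------

lemma pvDims_set3 (dp : List (List (List Int))) (N S : Nat) (hd : pvDims dp N S)
    (i j k : Nat) (hi : i < N) (hj : j < S) (hk : k < S) (v : Int) :
    pvDims (pvSet3 dp (i : Int) (j : Int) (k : Int) v) N S := by
  obtain ⟨hlen, hrow⟩ := hd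
  have hiL : i < dp.length := by omega
  have hRi : dp.getD i [] = dp[i] := List.getD_eq_getElem dp [] hiL
  have hRmem : dp[i] ∈ dp := List.getElem_mem hiL
  obtain ⟨hrl, hrr⟩ := hrow _ hRmem
  have hjL : j < dp[i].length := by omega
  have hCj : dp[i].getD j [] = dp[i][j] := List.getD_eq_getElem _ [] hjL
  have hCmem : dp[i][j] ∈ dp[i] := List.getElem_mem hjL
  unfold pvSet3
  simp only [PySem.List.pySetD_natCast, PySem.List.pyGetD_natCast, hRi, hCj]
  refine ⟨by simp [hlen], ?_⟩
  intro row hrowmem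
  rcases List.mem_or_eq_of_mem_set hrowmem with h | h
  · exact hrow row h
  · subst h
    refine ⟨by simp [hrl], ?_⟩
    intro r hr
    rcases List.mem_or_eq_of_mem_set hr with h1 | h1
    · exact hrr r h1
    · subst h1
      simp [hrr _ hCmem]

lemma pvGet3_set3 (dp : List (List (List Int))) (N S : Nat) (hd : pvDims dp N S)
    (i j k : Nat) (hi : i < N) (hj : j < S) (hk : k < S) (v : Int) (i' j' k' : Nat) :
    pvGet3 (pvSet3 dp (i : Int) (j : Int) (k : Int) v) (i' : Int) (j' : Int) (k' : Int)
      = if i' = i ∧ j' = j ∧ k' = k then v else pvGet3 dp (i' : Int) (j' : Int) (k' : Int) := by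
  obtain ⟨hlen, hrow⟩ := hd
  have hiL : i < dp.length := by omega
  have hRi : dp.getD i [] = dp[i] := List.getD_eq_getElem dp [] hiL
  have hRmem : dp[i] ∈ dp := List.getElem_mem hiL
  obtain ⟨hrl, hrr⟩ := hrow _ hRmem
  have hjL : j < dp[i].length := by omega
  have hCj : dp[i].getD j [] = dp[i][j] := List.getD_eq_getElem _ [] hjL
  unfold pvGet3 pvSet3
  simp only [PySem.List.pySetD_natCast, PySem.List.pyGetD_natCast, hRi, hCj]
  rw [pv_getD_set _ _ _ _ _ hiL]
  by_cases hii : i' = i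
  · subst hii
    rw [if_pos rfl, pv_getD_set _ _ _ _ _ (by omega : j < dp[i'].length)]
    by_cases hjj : j' = j
    · subst hjj
      rw [if_pos rfl, pv_getD_set _ _ _ _ _ (by rw [hrr _ (List.getElem_mem hjL)]; omega)]
      by_cases hkk : k' = k
      · subst hkk; rw [if_pos rfl, if_pos ⟨rfl, rfl, rfl⟩]
      · rw [if_neg hkk, if_neg (by tauto), hRi, hCj]
    · rw [if_neg hjj, if_neg (by tauto), hRi]
  · rw [if_neg hii, if_neg (by tauto)]

lemma pv_lloop (states counts mountains : List Int) (NN : Nat)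
    (iN jN kN : Nat) (h2i : 2 ≤ iN) (hi : iN < NN) (hjS : jN < states.length)
    (hkS : kN < states.length) :
    ∀ (ls : List Int) (dp : List (List (List Int))), pvDims dp NN states.length →
      (∀ l ∈ ls, 0 ≤ l) →
    pvDims (ls.foldl (fun dp l =>
        if ¬ PySem.Int.band (pvIx states l) (pvIx mountains ((iN : Int) - 2)) = 0 then dp else
        if ¬ PySem.Int.band (pvIx states (jN : Int)) (pvIx states l) = 0 then dp else
        if ¬ PySem.Int.band (pvIx states (kN : Int)) (pvIx states l) = 0 then dp else
        pvSet3 dp (iN : Int) (jN : Int) (kN : Int)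
          (max (pvGet3 dp (iN : Int) (jN : Int) (kN : Int))
            (pvGet3 dp ((iN : Int) - 1) (kN : Int) l + pvIx counts (jN : Int)))) dp)
      NN states.length
    ∧ ∀ (i' j' k' : Nat),
      pvGet3 (ls.foldl (fun dp l =>
        if ¬ PySem.Int.band (pvIx states l) (pvIx mountains ((iN : Int) - 2)) = 0 then dp else
        if ¬ PySem.Int.band (pvIx states (jN : Int)) (pvIx states l) = 0 then dp else
        if ¬ PySem.Int.band (pvIx states (kN : Int)) (pvIx states l) = 0 then dp else
        pvSet3 dp (iN : Int) (jN : Int) (kN : Int)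
          (max (pvGet3 dp (iN : Int) (jN : Int) (kN : Int))
            (pvGet3 dp ((iN : Int) - 1) (kN : Int) l + pvIx counts (jN : Int)))) dp)
        (i' : Int) (j' : Int) (k' : Int)
      = if i' = iN ∧ j' = jN ∧ k' = kN then
          ls.foldl (fun a l =>
            if PySem.Int.band (pvIx states l) (pvIx mountains ((iN : Int) - 2)) = 0 ∧
                PySem.Int.band (pvIx states (jN : Int)) (pvIx states l) = 0 ∧
                PySem.Int.band (pvIx states (kN : Int)) (pvIx states l) = 0
            then max a (pvGet3 dp ((iN : Int) - 1) (kN : Int) l + pvIx counts (jN : Int)) else a)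
            (pvGet3 dp (iN : Int) (jN : Int) (kN : Int))
        else pvGet3 dp (i' : Int) (j' : Int) (k' : Int) := by
  intro ls
  induction ls with
  | nil =>
    intro dp hd _
    refine ⟨hd, ?_⟩
    intro i' j' k'
    simp only [List.foldl_nil]
    split
    next h => obtain ⟨h1, h2, h3⟩ := h; subst h1; subst h2; subst h3; rfl
    next h => rfl
  | cons l0 ls ih =>
    intro dp hd hls
    have hl0 : 0 ≤ l0 := hls l0 (by simp)
    by_cases hC : PySem.Int.band (pvIx states l0) (pvIx mountains ((iN : Int) - 2)) = 0 ∧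
        PySem.Int.band (pvIx states (jN : Int)) (pvIx states l0) = 0 ∧
        PySem.Int.band (pvIx states (kN : Int)) (pvIx states l0) = 0
    · -- the guarded update fires
      obtain ⟨c1, c2, c3⟩ := hC
      set v := max (pvGet3 dp (iN : Int) (jN : Int) (kN : Int))
          (pvGet3 dp ((iN : Int) - 1) (kN : Int) l0 + pvIx counts (jN : Int)) with hv
      set dp' := pvSet3 dp (iN : Int) (jN : Int) (kN : Int) v with hdp'
      have hd' : pvDims dp' NN states.length :=
        pvDims_set3 dp NN states.length hd iN jN kN hi hjS hkS v
      obtain ⟨ihd, ihg⟩ := ih dp' hd' (fun l hl => hls l (by simp [hl]))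
      have hstep : ∀ (i' j' k' : Nat),
          pvGet3 dp' (i' : Int) (j' : Int) (k' : Int)
            = if i' = iN ∧ j' = jN ∧ k' = kN then v
              else pvGet3 dp (i' : Int) (j' : Int) (k' : Int) :=
        fun i' j' k' => pvGet3_set3 dp NN states.length hd iN jN kN hi hjS hkS v i' j' k'
      have hcast1 : ((iN : Int) - 1) = ((iN - 1 : Nat) : Int) := by omega
      have hread : ∀ (dq : List (List (List Int))) (hq : ∀ (i' j' k' : Nat),
            pvGet3 dq (i' : Int) (j' : Int) (k' : Int)
              = if i' = iN ∧ j' = jN ∧ k' = kN then v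
                else pvGet3 dp (i' : Int) (j' : Int) (k' : Int))
          (l : Int), 0 ≤ l →
          pvGet3 dq ((iN : Int) - 1) (kN : Int) l = pvGet3 dp ((iN : Int) - 1) (kN : Int) l := by
        intro dq hq l hl
        have hlc : l = ((l.toNat : Nat) : Int) := by omega
        rw [hcast1, hlc, hq (iN - 1) kN l.toNat, if_neg (by omega)]
      constructor
      · simpa only [List.foldl_cons, if_neg (not_not_intro c1), if_neg (not_not_intro c2),
          if_neg (not_not_intro c3)] using ihd
      · intro i' j' k'
        simp only [List.foldl_cons, if_neg (not_not_intro c1), if_neg (not_not_intro c2),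
          if_neg (not_not_intro c3)]
        rw [ihg i' j' k']
        by_cases htgt : i' = iN ∧ j' = jN ∧ k' = kN
        · rw [if_pos htgt, if_pos htgt, if_pos ⟨c1, c2, c3⟩]
          have hstart : pvGet3 dp' (iN : Int) (jN : Int) (kN : Int) = v := by
            rw [hstep iN jN kN, if_pos ⟨rfl, rfl, rfl⟩]
          rw [hstart]
          exact PySem.List.foldl_congr_mem ls _ _ v
            (fun acc l hl => by rw [hread dp' hstep l (hls l (by simp [hl]))])
        · rw [if_neg htgt, if_neg htgt, hstep i' j' k', if_neg htgt]
    · -- some guard rejects: the step leaves dp unchanged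
      have hstep : (if ¬ PySem.Int.band (pvIx states l0) (pvIx mountains ((iN : Int) - 2)) = 0 then dp else
          if ¬ PySem.Int.band (pvIx states (jN : Int)) (pvIx states l0) = 0 then dp else
          if ¬ PySem.Int.band (pvIx states (kN : Int)) (pvIx states l0) = 0 then dp else
          pvSet3 dp (iN : Int) (jN : Int) (kN : Int)
            (max (pvGet3 dp (iN : Int) (jN : Int) (kN : Int))
              (pvGet3 dp ((iN : Int) - 1) (kN : Int) l0 + pvIx counts (jN : Int)))) = dp := by
        by_cases c1 : PySem.Int.band (pvIx states l0) (pvIx mountains ((iN : Int) - 2)) = 0 <;>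
          by_cases c2 : PySem.Int.band (pvIx states (jN : Int)) (pvIx states l0) = 0 <;>
          by_cases c3 : PySem.Int.band (pvIx states (kN : Int)) (pvIx states l0) = 0 <;>
          simp [c1, c2, c3] <;> tauto
      obtain ⟨ihd, ihg⟩ := ih dp hd (fun l hl => hls l (by simp [hl]))
      constructor
      · simpa only [List.foldl_cons, hstep] using ihd
      · intro i' j' k'
        simp only [List.foldl_cons, hstep]
        rw [ihg i' j' k']
        by_cases htgt : i' = iN ∧ j' = jN ∧ k' = kN
        · rw [if_pos htgt, if_pos htgt, if_neg hC]
        · rw [if_neg htgt, if_neg htgt]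

lemma pv_kloop (states counts mountains : List Int) (NN : Nat)
    (iN jN : Nat) (h2i : 2 ≤ iN) (hi : iN < NN) (hjS : jN < states.length) :
    ∀ (ks : List Int) (dp : List (List (List Int))), pvDims dp NN states.length →
      ks.Nodup → (∀ k ∈ ks, 0 ≤ k ∧ k < (states.length : Int)) →
    pvDims (ks.foldl (fun dp k =>
        if ¬ PySem.Int.band (pvIx states k) (pvIx mountains ((iN : Int) - 1)) = 0 then dp else
        if ¬ PySem.Int.band (pvIx states (jN : Int)) (pvIx states k) = 0 then dp else
        (PySem.List.pyRange 0 (PySem.List.len states) 1).foldl (fun dp l =>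
          if ¬ PySem.Int.band (pvIx states l) (pvIx mountains ((iN : Int) - 2)) = 0 then dp else
          if ¬ PySem.Int.band (pvIx states (jN : Int)) (pvIx states l) = 0 then dp else
          if ¬ PySem.Int.band (pvIx states k) (pvIx states l) = 0 then dp else
          pvSet3 dp (iN : Int) (jN : Int) k
            (max (pvGet3 dp (iN : Int) (jN : Int) k)
              (pvGet3 dp ((iN : Int) - 1) k l + pvIx counts (jN : Int)))) dp) dp)
      NN states.length
    ∧ ∀ (i' j' k' : Nat),
      pvGet3 (ks.foldl (fun dp k =>
        if ¬ PySem.Int.band (pvIx states k) (pvIx mountains ((iN : Int) - 1)) = 0 then dp else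
        if ¬ PySem.Int.band (pvIx states (jN : Int)) (pvIx states k) = 0 then dp else
        (PySem.List.pyRange 0 (PySem.List.len states) 1).foldl (fun dp l =>
          if ¬ PySem.Int.band (pvIx states l) (pvIx mountains ((iN : Int) - 2)) = 0 then dp else
          if ¬ PySem.Int.band (pvIx states (jN : Int)) (pvIx states l) = 0 then dp else
          if ¬ PySem.Int.band (pvIx states k) (pvIx states l) = 0 then dp else
          pvSet3 dp (iN : Int) (jN : Int) k
            (max (pvGet3 dp (iN : Int) (jN : Int) k)
              (pvGet3 dp ((iN : Int) - 1) k l + pvIx counts (jN : Int)))) dp) dp)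
        (i' : Int) (j' : Int) (k' : Int)
      = if i' = iN ∧ j' = jN ∧ ((k' : Int) ∈ ks ∧
            PySem.Int.band (pvIx states (k' : Int)) (pvIx mountains ((iN : Int) - 1)) = 0 ∧
            PySem.Int.band (pvIx states (jN : Int)) (pvIx states (k' : Int)) = 0) then
          (PySem.List.pyRange 0 (PySem.List.len states) 1).foldl (fun a l =>
            if PySem.Int.band (pvIx states l) (pvIx mountains ((iN : Int) - 2)) = 0 ∧
                PySem.Int.band (pvIx states (jN : Int)) (pvIx states l) = 0 ∧
                PySem.Int.band (pvIx states (k' : Int)) (pvIx states l) = 0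
            then max a (pvGet3 dp ((iN : Int) - 1) (k' : Int) l + pvIx counts (jN : Int)) else a)
            (pvGet3 dp (iN : Int) (jN : Int) (k' : Int))
        else pvGet3 dp (i' : Int) (j' : Int) (k' : Int) := by
  intro ks
  induction ks with
  | nil =>
    intro dp hd _ _
    refine ⟨hd, ?_⟩
    intro i' j' k'
    simp only [List.foldl_nil, List.not_mem_nil, false_and, and_false, if_false]
  | cons k0 ks ih =>
    intro dp hd hnd hks
    obtain ⟨hk00, hk0S⟩ := hks k0 (by simp)
    have hk0N : k0 = ((k0.toNat : Nat) : Int) := by omega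
    have hk0nin : k0 ∉ ks := (List.nodup_cons.mp hnd).1
    have hndtl : ks.Nodup := (List.nodup_cons.mp hnd).2
    have hkstl : ∀ k ∈ ks, 0 ≤ k ∧ k < (states.length : Int) := fun k hk => hks k (by simp [hk])
    by_cases hG : PySem.Int.band (pvIx states k0) (pvIx mountains ((iN : Int) - 1)) = 0 ∧
        PySem.Int.band (pvIx states (jN : Int)) (pvIx states k0) = 0
    · obtain ⟨g1, g2⟩ := hG
      have hrange : ∀ l ∈ PySem.List.pyRange 0 (PySem.List.len states) 1, 0 ≤ l := by
        intro l hl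
        rw [PySem.List.len_eq, PySem.List.mem_pyRange_one] at hl
        omega
      have hll := pv_lloop states counts mountains NN iN jN k0.toNat h2i hi hjS
        (by omega) (PySem.List.pyRange 0 (PySem.List.len states) 1) dp hd hrange
      rw [← hk0N] at hll
      obtain ⟨hd', hg'⟩ := hll
      set dp' := (PySem.List.pyRange 0 (PySem.List.len states) 1).foldl (fun dp l =>
          if ¬ PySem.Int.band (pvIx states l) (pvIx mountains ((iN : Int) - 2)) = 0 then dp else
          if ¬ PySem.Int.band (pvIx states (jN : Int)) (pvIx states l) = 0 then dp else
          if ¬ PySem.Int.band (pvIx states k0) (pvIx states l) = 0 then dp else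
          pvSet3 dp (iN : Int) (jN : Int) k0
            (max (pvGet3 dp (iN : Int) (jN : Int) k0)
              (pvGet3 dp ((iN : Int) - 1) k0 l + pvIx counts (jN : Int)))) dp with hdp'
      obtain ⟨ihd, ihg⟩ := ih dp' hd' hndtl hkstl
      have hget' : ∀ (i' j' k' : Nat), ¬ (i' = iN ∧ j' = jN ∧ (k' : Int) = k0) →
          pvGet3 dp' (i' : Int) (j' : Int) (k' : Int) = pvGet3 dp (i' : Int) (j' : Int) (k' : Int) := by
        intro i' j' k' hne
        rw [hg' i' j' k', if_neg (by
          intro hcon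
          exact hne ⟨hcon.1, hcon.2.1, by omega⟩)]
      constructor
      · simpa only [List.foldl_cons, if_neg (not_not_intro g1), if_neg (not_not_intro g2)] using ihd
      · intro i' j' k'
        simp only [List.foldl_cons, if_neg (not_not_intro g1), if_neg (not_not_intro g2)]
        rw [ihg i' j' k']
        by_cases htgt : i' = iN ∧ j' = jN ∧ ((k' : Int) ∈ ks ∧
            PySem.Int.band (pvIx states (k' : Int)) (pvIx mountains ((iN : Int) - 1)) = 0 ∧
            PySem.Int.band (pvIx states (jN : Int)) (pvIx states (k' : Int)) = 0)
        · -- k' is handled later in ks: reads from dp' equal reads from dp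
          have hk'k0 : ¬ ((k' : Int) = k0) := fun h => hk0nin (h ▸ htgt.2.2.1)
          rw [if_pos htgt, if_pos ⟨htgt.1, htgt.2.1, by simp [htgt.2.2.1], htgt.2.2.2⟩]
          have hstart : pvGet3 dp' (iN : Int) (jN : Int) (k' : Int)
              = pvGet3 dp (iN : Int) (jN : Int) (k' : Int) :=
            hget' iN jN k' (by tauto)
          rw [hstart]
          refine PySem.List.foldl_congr_mem _ _ _ _ ?_
          intro acc l hl
          have hl0 : 0 ≤ l := hrange l hl
          have hcast1 : ((iN : Int) - 1) = ((iN - 1 : Nat) : Int) := by omega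
          have hlc : l = ((l.toNat : Nat) : Int) := by omega
          have : pvGet3 dp' ((iN : Int) - 1) (k' : Int) l
              = pvGet3 dp ((iN : Int) - 1) (k' : Int) l := by
            rw [hcast1, hlc]
            exact hget' (iN - 1) k' l.toNat (by omega)
          rw [this]
        · rw [if_neg htgt]
          by_cases hk'k0 : (k' : Int) = k0 ∧ i' = iN ∧ j' = jN
          · -- this is the cell the k0 iteration just wrote
            obtain ⟨he, hei, hej⟩ := hk'k0
            rw [hg' i' j' k', if_pos ⟨hei, hej, by omega⟩,
              if_pos ⟨hei, hej, by simp [he], by rw [he]; exact g1, by rw [he]; exact g2⟩]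
            rw [he]
          · rw [hget' i' j' k' (by tauto), if_neg (by
              intro hcon
              rcases List.mem_cons.mp hcon.2.2.1 with h | h
              · exact hk'k0 ⟨h, hcon.1, hcon.2.1⟩
              · exact htgt ⟨hcon.1, hcon.2.1, h, hcon.2.2.2⟩)]
    · have hstep : (if ¬ PySem.Int.band (pvIx states k0) (pvIx mountains ((iN : Int) - 1)) = 0 then dp else
          if ¬ PySem.Int.band (pvIx states (jN : Int)) (pvIx states k0) = 0 then dp else
          (PySem.List.pyRange 0 (PySem.List.len states) 1).foldl (fun dp l =>
            if ¬ PySem.Int.band (pvIx states l) (pvIx mountains ((iN : Int) - 2)) = 0 then dp else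
            if ¬ PySem.Int.band (pvIx states (jN : Int)) (pvIx states l) = 0 then dp else
            if ¬ PySem.Int.band (pvIx states k0) (pvIx states l) = 0 then dp else
            pvSet3 dp (iN : Int) (jN : Int) k0
              (max (pvGet3 dp (iN : Int) (jN : Int) k0)
                (pvGet3 dp ((iN : Int) - 1) k0 l + pvIx counts (jN : Int)))) dp) = dp := by
        by_cases c1 : PySem.Int.band (pvIx states k0) (pvIx mountains ((iN : Int) - 1)) = 0 <;>
          by_cases c2 : PySem.Int.band (pvIx states (jN : Int)) (pvIx states k0) = 0 <;>
          simp [c1, c2] <;> tauto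
      obtain ⟨ihd, ihg⟩ := ih dp hd hndtl hkstl
      constructor
      · simpa only [List.foldl_cons, hstep] using ihd
      · intro i' j' k'
        simp only [List.foldl_cons, hstep]
        rw [ihg i' j' k']
        by_cases htgt : i' = iN ∧ j' = jN ∧ ((k' : Int) ∈ ks ∧
            PySem.Int.band (pvIx states (k' : Int)) (pvIx mountains ((iN : Int) - 1)) = 0 ∧
            PySem.Int.band (pvIx states (jN : Int)) (pvIx states (k' : Int)) = 0)
        · rw [if_pos htgt, if_pos ⟨htgt.1, htgt.2.1, by simp [htgt.2.2.1], htgt.2.2.2⟩]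
        · rw [if_neg htgt, if_neg (by
            intro hcon
            rcases List.mem_cons.mp hcon.2.2.1 with h | h
            · exact hG (h ▸ ⟨hcon.2.2.2.1, hcon.2.2.2.2⟩)
            · exact htgt ⟨hcon.1, hcon.2.1, h, hcon.2.2.2⟩)]

lemma pv_jloop (states counts mountains : List Int) (NN : Nat)
    (iN : Nat) (h2i : 2 ≤ iN) (hi : iN < NN) :
    ∀ (js : List Int) (dp : List (List (List Int))), pvDims dp NN states.length →
      js.Nodup → (∀ j ∈ js, 0 ≤ j ∧ j < (states.length : Int)) →
    pvDims (js.foldl (fun dp j =>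
        if ¬ PySem.Int.band (pvIx states j) (pvIx mountains (iN : Int)) = 0 then dp else
        (PySem.List.pyRange 0 (PySem.List.len states) 1).foldl (fun dp k =>
          if ¬ PySem.Int.band (pvIx states k) (pvIx mountains ((iN : Int) - 1)) = 0 then dp else
          if ¬ PySem.Int.band (pvIx states j) (pvIx states k) = 0 then dp else
          (PySem.List.pyRange 0 (PySem.List.len states) 1).foldl (fun dp l =>
            if ¬ PySem.Int.band (pvIx states l) (pvIx mountains ((iN : Int) - 2)) = 0 then dp else
            if ¬ PySem.Int.band (pvIx states j) (pvIx states l) = 0 then dp else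
            if ¬ PySem.Int.band (pvIx states k) (pvIx states l) = 0 then dp else
            pvSet3 dp (iN : Int) j k
              (max (pvGet3 dp (iN : Int) j k)
                (pvGet3 dp ((iN : Int) - 1) k l + pvIx counts j))) dp) dp) dp)
      NN states.length
    ∧ ∀ (i' j' k' : Nat),
      pvGet3 (js.foldl (fun dp j =>
        if ¬ PySem.Int.band (pvIx states j) (pvIx mountains (iN : Int)) = 0 then dp else
        (PySem.List.pyRange 0 (PySem.List.len states) 1).foldl (fun dp k =>
          if ¬ PySem.Int.band (pvIx states k) (pvIx mountains ((iN : Int) - 1)) = 0 then dp else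
          if ¬ PySem.Int.band (pvIx states j) (pvIx states k) = 0 then dp else
          (PySem.List.pyRange 0 (PySem.List.len states) 1).foldl (fun dp l =>
            if ¬ PySem.Int.band (pvIx states l) (pvIx mountains ((iN : Int) - 2)) = 0 then dp else
            if ¬ PySem.Int.band (pvIx states j) (pvIx states l) = 0 then dp else
            if ¬ PySem.Int.band (pvIx states k) (pvIx states l) = 0 then dp else
            pvSet3 dp (iN : Int) j k
              (max (pvGet3 dp (iN : Int) j k)
                (pvGet3 dp ((iN : Int) - 1) k l + pvIx counts j))) dp) dp) dp)
        (i' : Int) (j' : Int) (k' : Int)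
      = if i' = iN ∧ ((j' : Int) ∈ js ∧
            PySem.Int.band (pvIx states (j' : Int)) (pvIx mountains (iN : Int)) = 0) ∧
          ((k' : Int) ∈ PySem.List.pyRange 0 (PySem.List.len states) 1 ∧
            PySem.Int.band (pvIx states (k' : Int)) (pvIx mountains ((iN : Int) - 1)) = 0 ∧
            PySem.Int.band (pvIx states (j' : Int)) (pvIx states (k' : Int)) = 0) then
          (PySem.List.pyRange 0 (PySem.List.len states) 1).foldl (fun a l =>
            if PySem.Int.band (pvIx states l) (pvIx mountains ((iN : Int) - 2)) = 0 ∧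
                PySem.Int.band (pvIx states (j' : Int)) (pvIx states l) = 0 ∧
                PySem.Int.band (pvIx states (k' : Int)) (pvIx states l) = 0
            then max a (pvGet3 dp ((iN : Int) - 1) (k' : Int) l + pvIx counts (j' : Int)) else a)
            (pvGet3 dp (iN : Int) (j' : Int) (k' : Int))
        else pvGet3 dp (i' : Int) (j' : Int) (k' : Int) := by
  intro js
  induction js with
  | nil =>
    intro dp hd _ _
    refine ⟨hd, ?_⟩
    intro i' j' k'
    simp only [List.foldl_nil, List.not_mem_nil, false_and, and_false, false_and, if_false]
  | cons j0 js ih =>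
    intro dp hd hnd hjs
    obtain ⟨hj00, hj0S⟩ := hjs j0 (by simp)
    have hj0N : j0 = ((j0.toNat : Nat) : Int) := by omega
    have hj0nin : j0 ∉ js := (List.nodup_cons.mp hnd).1
    have hndtl : js.Nodup := (List.nodup_cons.mp hnd).2
    have hjstl : ∀ j ∈ js, 0 ≤ j ∧ j < (states.length : Int) := fun j hj => hjs j (by simp [hj])
    by_cases hG : PySem.Int.band (pvIx states j0) (pvIx mountains (iN : Int)) = 0
    · have hrangeN : (PySem.List.pyRange 0 (PySem.List.len states) 1).Nodup :=
        PySem.List.nodup_pyRange_one _ _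
      have hrangeB : ∀ k ∈ PySem.List.pyRange 0 (PySem.List.len states) 1,
          0 ≤ k ∧ k < (states.length : Int) := by
        intro k hk
        rw [PySem.List.len_eq, PySem.List.mem_pyRange_one] at hk
        exact ⟨hk.1, by exact_mod_cast hk.2⟩
      have hkk := pv_kloop states counts mountains NN iN j0.toNat h2i hi (by omega)
        (PySem.List.pyRange 0 (PySem.List.len states) 1) dp hd hrangeN hrangeB
      rw [← hj0N] at hkk
      obtain ⟨hd', hg'⟩ := hkk
      set dp' := (PySem.List.pyRange 0 (PySem.List.len states) 1).foldl (fun dp k =>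
          if ¬ PySem.Int.band (pvIx states k) (pvIx mountains ((iN : Int) - 1)) = 0 then dp else
          if ¬ PySem.Int.band (pvIx states j0) (pvIx states k) = 0 then dp else
          (PySem.List.pyRange 0 (PySem.List.len states) 1).foldl (fun dp l =>
            if ¬ PySem.Int.band (pvIx states l) (pvIx mountains ((iN : Int) - 2)) = 0 then dp else
            if ¬ PySem.Int.band (pvIx states j0) (pvIx states l) = 0 then dp else
            if ¬ PySem.Int.band (pvIx states k) (pvIx states l) = 0 then dp else
            pvSet3 dp (iN : Int) j0 k
              (max (pvGet3 dp (iN : Int) j0 k)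
                (pvGet3 dp ((iN : Int) - 1) k l + pvIx counts j0))) dp) dp with hdp'
      obtain ⟨ihd, ihg⟩ := ih dp' hd' hndtl hjstl
      have hget' : ∀ (i' j' k' : Nat), ¬ (i' = iN ∧ (j' : Int) = j0) →
          pvGet3 dp' (i' : Int) (j' : Int) (k' : Int) = pvGet3 dp (i' : Int) (j' : Int) (k' : Int) := by
        intro i' j' k' hne
        rw [hg' i' j' k', if_neg (by
          intro hcon
          exact hne ⟨hcon.1, by omega⟩)]
      constructor
      · simpa only [List.foldl_cons, if_neg (not_not_intro hG)] using ihd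
      · intro i' j' k'
        simp only [List.foldl_cons, if_neg (not_not_intro hG)]
        rw [ihg i' j' k']
        by_cases htgt : i' = iN ∧ ((j' : Int) ∈ js ∧
            PySem.Int.band (pvIx states (j' : Int)) (pvIx mountains (iN : Int)) = 0) ∧
          ((k' : Int) ∈ PySem.List.pyRange 0 (PySem.List.len states) 1 ∧
            PySem.Int.band (pvIx states (k' : Int)) (pvIx mountains ((iN : Int) - 1)) = 0 ∧
            PySem.Int.band (pvIx states (j' : Int)) (pvIx states (k' : Int)) = 0)
        · have hj'j0 : ¬ ((j' : Int) = j0) := fun h => hj0nin (h ▸ htgt.2.1.1)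
          rw [if_pos htgt, if_pos ⟨htgt.1, ⟨by simp [htgt.2.1.1], htgt.2.1.2⟩, htgt.2.2⟩]
          have hstart : pvGet3 dp' (iN : Int) (j' : Int) (k' : Int)
              = pvGet3 dp (iN : Int) (j' : Int) (k' : Int) :=
            hget' iN j' k' (by tauto)
          rw [hstart]
          refine PySem.List.foldl_congr_mem _ _ _ _ ?_
          intro acc l hl
          have hl0 : 0 ≤ l := (hrangeB l hl).1
          have hcast1 : ((iN : Int) - 1) = ((iN - 1 : Nat) : Int) := by omega
          have hlc : l = ((l.toNat : Nat) : Int) := by omega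
          have : pvGet3 dp' ((iN : Int) - 1) (k' : Int) l
              = pvGet3 dp ((iN : Int) - 1) (k' : Int) l := by
            rw [hcast1, hlc]
            exact hget' (iN - 1) k' l.toNat (by omega)
          rw [this]
        · rw [if_neg htgt]
          by_cases hj'j0 : (j' : Int) = j0 ∧ i' = iN
          · obtain ⟨he, hei⟩ := hj'j0
            by_cases hkc : ((k' : Int) ∈ PySem.List.pyRange 0 (PySem.List.len states) 1 ∧
                PySem.Int.band (pvIx states (k' : Int)) (pvIx mountains ((iN : Int) - 1)) = 0 ∧
                PySem.Int.band (pvIx states (j' : Int)) (pvIx states (k' : Int)) = 0)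
            · rw [hg' i' j' k', if_pos ⟨hei, by omega,
                ⟨hkc.1, hkc.2.1, by rw [← he]; exact hkc.2.2⟩⟩,
                if_pos ⟨hei, ⟨by simp [he], by rw [he]; exact hG⟩, hkc⟩]
              rw [he]
            · rw [hg' i' j' k', if_neg (by
                intro hcon
                exact hkc ⟨hcon.2.2.1, hcon.2.2.2.1, by rw [he]; exact hcon.2.2.2.2⟩),
                if_neg (by
                intro hcon
                exact hkc hcon.2.2)]
          · rw [hget' i' j' k' (by tauto), if_neg (by
              intro hcon
              rcases List.mem_cons.mp hcon.2.1.1 with h | h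
              · exact (by tauto : ¬ ((j' : Int) = j0 ∧ i' = iN)) ⟨h, hcon.1⟩
              · exact htgt ⟨hcon.1, ⟨h, hcon.2.1.2⟩, hcon.2.2⟩)]
    · have hstep0 : ∀ (dq : List (List (List Int))),
          (if ¬ PySem.Int.band (pvIx states j0) (pvIx mountains (iN : Int)) = 0 then dq else
          (PySem.List.pyRange 0 (PySem.List.len states) 1).foldl (fun dp k =>
            if ¬ PySem.Int.band (pvIx states k) (pvIx mountains ((iN : Int) - 1)) = 0 then dp else
            if ¬ PySem.Int.band (pvIx states j0) (pvIx states k) = 0 then dp else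
            (PySem.List.pyRange 0 (PySem.List.len states) 1).foldl (fun dp l =>
              if ¬ PySem.Int.band (pvIx states l) (pvIx mountains ((iN : Int) - 2)) = 0 then dp else
              if ¬ PySem.Int.band (pvIx states j0) (pvIx states l) = 0 then dp else
              if ¬ PySem.Int.band (pvIx states k) (pvIx states l) = 0 then dp else
              pvSet3 dp (iN : Int) j0 k
                (max (pvGet3 dp (iN : Int) j0 k)
                  (pvGet3 dp ((iN : Int) - 1) k l + pvIx counts j0))) dp) dq) = dq := by
        intro dq
        rw [if_pos hG]
      obtain ⟨ihd, ihg⟩ := ih dp hd hndtl hjstl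
      constructor
      · simpa only [List.foldl_cons, hstep0] using ihd
      · intro i' j' k'
        simp only [List.foldl_cons, hstep0]
        rw [ihg i' j' k']
        by_cases htgt : i' = iN ∧ ((j' : Int) ∈ js ∧
            PySem.Int.band (pvIx states (j' : Int)) (pvIx mountains (iN : Int)) = 0) ∧
          ((k' : Int) ∈ PySem.List.pyRange 0 (PySem.List.len states) 1 ∧
            PySem.Int.band (pvIx states (k' : Int)) (pvIx mountains ((iN : Int) - 1)) = 0 ∧
            PySem.Int.band (pvIx states (j' : Int)) (pvIx states (k' : Int)) = 0)
        · rw [if_pos htgt, if_pos ⟨htgt.1, ⟨by simp [htgt.2.1.1], htgt.2.1.2⟩, htgt.2.2⟩]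
        · rw [if_neg htgt, if_neg (by
            intro hcon
            rcases List.mem_cons.mp hcon.2.1.1 with h | h
            · exact hG (h ▸ hcon.2.1.2)
            · exact htgt ⟨hcon.1, ⟨h, hcon.2.1.2⟩, hcon.2.2⟩)]

lemma pv_row0 (states counts mountains : List Int) (NN : Nat) (hNN : 0 < NN)
    (hS : 0 < states.length) :
    ∀ (js : List Int) (dp : List (List (List Int))), pvDims dp NN states.length →
      js.Nodup → (∀ j ∈ js, 0 ≤ j ∧ j < (states.length : Int)) →
    pvDims (js.foldl (fun dp j =>
        if PySem.Int.band (pvIx states j) (pvIx mountains 0) = 0 then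
          pvSet3 dp 0 j 0 (pvIx counts j)
        else dp) dp) NN states.length
    ∧ ∀ (i' j' k' : Nat),
      pvGet3 (js.foldl (fun dp j =>
        if PySem.Int.band (pvIx states j) (pvIx mountains 0) = 0 then
          pvSet3 dp 0 j 0 (pvIx counts j)
        else dp) dp) (i' : Int) (j' : Int) (k' : Int)
      = if i' = 0 ∧ ((j' : Int) ∈ js ∧
            PySem.Int.band (pvIx states (j' : Int)) (pvIx mountains 0) = 0) ∧ k' = 0 then
          pvIx counts (j' : Int)
        else pvGet3 dp (i' : Int) (j' : Int) (k' : Int) := by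
  intro js
  induction js with
  | nil =>
    intro dp hd _ _
    refine ⟨hd, ?_⟩
    intro i' j' k'
    simp only [List.foldl_nil, List.not_mem_nil, false_and, and_false, false_and, if_false]
  | cons j0 js ih =>
    intro dp hd hnd hjs
    obtain ⟨hj00, hj0S⟩ := hjs j0 (by simp)
    have hj0N : j0 = ((j0.toNat : Nat) : Int) := by omega
    have hj0nin : j0 ∉ js := (List.nodup_cons.mp hnd).1
    have hndtl : js.Nodup := (List.nodup_cons.mp hnd).2
    have hjstl : ∀ j ∈ js, 0 ≤ j ∧ j < (states.length : Int) := fun j hj => hjs j (by simp [hj])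
    by_cases hG : PySem.Int.band (pvIx states j0) (pvIx mountains 0) = 0
    · set dp' := pvSet3 dp 0 j0 0 (pvIx counts j0) with hdp'
      have hd' : pvDims dp' NN states.length := by
        rw [hdp', hj0N, (by norm_num : (0:Int) = ((0:Nat):Int))]
        exact pvDims_set3 dp NN states.length hd 0 j0.toNat 0 hNN (by omega) hS _
      have hstep : ∀ (i' j' k' : Nat),
          pvGet3 dp' (i' : Int) (j' : Int) (k' : Int)
            = if i' = 0 ∧ j' = j0.toNat ∧ k' = 0 then pvIx counts j0
              else pvGet3 dp (i' : Int) (j' : Int) (k' : Int) := by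
        intro i' j' k'
        rw [hdp', hj0N, (by norm_num : (0:Int) = ((0:Nat):Int))]
        exact pvGet3_set3 dp NN states.length hd 0 j0.toNat 0 hNN (by omega) hS _ i' j' k'
      obtain ⟨ihd, ihg⟩ := ih dp' hd' hndtl hjstl
      constructor
      · simpa only [List.foldl_cons, if_pos hG] using ihd
      · intro i' j' k'
        simp only [List.foldl_cons, if_pos hG]
        rw [ihg i' j' k', hstep i' j' k']
        by_cases htgt : i' = 0 ∧ ((j' : Int) ∈ js ∧
            PySem.Int.band (pvIx states (j' : Int)) (pvIx mountains 0) = 0) ∧ k' = 0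
        · rw [if_pos htgt, if_pos ⟨htgt.1, ⟨by simp [htgt.2.1.1], htgt.2.1.2⟩, htgt.2.2⟩]
        · rw [if_neg htgt]
          by_cases hj'j0 : i' = 0 ∧ j' = j0.toNat ∧ k' = 0
          · rw [if_pos hj'j0, if_pos ⟨hj'j0.1, ⟨by simp [hj'j0.2.1]; omega,
              by rw [(by omega : (j' : Int) = j0)]; exact hG⟩, hj'j0.2.2⟩]
            rw [(by omega : (j' : Int) = j0)]
          · rw [if_neg hj'j0, if_neg (by
              intro hcon
              rcases List.mem_cons.mp hcon.2.1.1 with h | h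
              · exact hj'j0 ⟨hcon.1, by omega, hcon.2.2⟩
              · exact htgt ⟨hcon.1, ⟨h, hcon.2.1.2⟩, hcon.2.2⟩)]
    · obtain ⟨ihd, ihg⟩ := ih dp hd hndtl hjstl
      constructor
      · simpa only [List.foldl_cons, if_neg hG] using ihd
      · intro i' j' k'
        simp only [List.foldl_cons, if_neg hG]
        rw [ihg i' j' k']
        by_cases htgt : i' = 0 ∧ ((j' : Int) ∈ js ∧
            PySem.Int.band (pvIx states (j' : Int)) (pvIx mountains 0) = 0) ∧ k' = 0
        · rw [if_pos htgt, if_pos ⟨htgt.1, ⟨by simp [htgt.2.1.1], htgt.2.1.2⟩, htgt.2.2⟩]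
        · rw [if_neg htgt, if_neg (by
            intro hcon
            rcases List.mem_cons.mp hcon.2.1.1 with h | h
            · exact hG (h ▸ hcon.2.1.2)
            · exact htgt ⟨hcon.1, ⟨h, hcon.2.1.2⟩, hcon.2.2⟩)]

lemma pv_k1loop (states counts mountains : List Int) (NN : Nat) (hNN : 1 < NN)
    (jN : Nat) (hjS : jN < states.length) :
    ∀ (ks : List Int) (dp : List (List (List Int))), pvDims dp NN states.length →
      ks.Nodup → (∀ k ∈ ks, 0 ≤ k ∧ k < (states.length : Int)) →
    pvDims (ks.foldl (fun dp k =>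
        if ¬ PySem.Int.band (pvIx states k) (pvIx mountains 0) = 0 then dp else
        if PySem.Int.band (pvIx states (jN : Int)) (pvIx states k) = 0 then
          pvSet3 dp 1 (jN : Int) k
            (max (pvGet3 dp 1 (jN : Int) k) (pvGet3 dp 0 k 0 + pvIx counts (jN : Int)))
        else dp) dp) NN states.length
    ∧ ∀ (i' j' k' : Nat),
      pvGet3 (ks.foldl (fun dp k =>
        if ¬ PySem.Int.band (pvIx states k) (pvIx mountains 0) = 0 then dp else
        if PySem.Int.band (pvIx states (jN : Int)) (pvIx states k) = 0 then
          pvSet3 dp 1 (jN : Int) k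
            (max (pvGet3 dp 1 (jN : Int) k) (pvGet3 dp 0 k 0 + pvIx counts (jN : Int)))
        else dp) dp) (i' : Int) (j' : Int) (k' : Int)
      = if i' = 1 ∧ j' = jN ∧ ((k' : Int) ∈ ks ∧
            PySem.Int.band (pvIx states (k' : Int)) (pvIx mountains 0) = 0 ∧
            PySem.Int.band (pvIx states (jN : Int)) (pvIx states (k' : Int)) = 0) then
          max (pvGet3 dp 1 (jN : Int) (k' : Int))
            (pvGet3 dp 0 (k' : Int) 0 + pvIx counts (jN : Int))
        else pvGet3 dp (i' : Int) (j' : Int) (k' : Int) := by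
  intro ks
  induction ks with
  | nil =>
    intro dp hd _ _
    refine ⟨hd, ?_⟩
    intro i' j' k'
    simp only [List.foldl_nil, List.not_mem_nil, false_and, and_false, if_false]
  | cons k0 ks ih =>
    intro dp hd hnd hks
    obtain ⟨hk00, hk0S⟩ := hks k0 (by simp)
    have hk0nin : k0 ∉ ks := (List.nodup_cons.mp hnd).1
    have hndtl : ks.Nodup := (List.nodup_cons.mp hnd).2
    have hkstl : ∀ k ∈ ks, 0 ≤ k ∧ k < (states.length : Int) := fun k hk => hks k (by simp [hk])
    by_cases hG : PySem.Int.band (pvIx states k0) (pvIx mountains 0) = 0 ∧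
        PySem.Int.band (pvIx states (jN : Int)) (pvIx states k0) = 0
    · obtain ⟨g1, g2⟩ := hG
      set dp' := pvSet3 dp 1 (jN : Int) k0
          (max (pvGet3 dp 1 (jN : Int) k0) (pvGet3 dp 0 k0 0 + pvIx counts (jN : Int))) with hdp'
      have hd' : pvDims dp' NN states.length := by
        rw [hdp', (by omega : (k0 : Int) = ((k0.toNat : Nat) : Int)),
          (by norm_num : (1:Int) = ((1:Nat):Int))]
        exact pvDims_set3 dp NN states.length hd 1 jN k0.toNat hNN hjS (by omega) _
      have hstep : ∀ (i' j' k' : Nat),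
          pvGet3 dp' (i' : Int) (j' : Int) (k' : Int)
            = if i' = 1 ∧ j' = jN ∧ k' = k0.toNat then
                max (pvGet3 dp 1 (jN : Int) k0) (pvGet3 dp 0 k0 0 + pvIx counts (jN : Int))
              else pvGet3 dp (i' : Int) (j' : Int) (k' : Int) := by
        intro i' j' k'
        have h1 := pvGet3_set3 dp NN states.length hd 1 jN k0.toNat hNN hjS (by omega)
          (max (pvGet3 dp 1 (jN : Int) k0) (pvGet3 dp 0 k0 0 + pvIx counts (jN : Int))) i' j' k'
        rw [hdp', (by omega : (k0 : Int) = ((k0.toNat : Nat) : Int)),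
          (by norm_num : (1:Int) = ((1:Nat):Int))]
        rw [(by omega : (k0 : Int) = ((k0.toNat : Nat) : Int)),
          (by norm_num : (1:Int) = ((1:Nat):Int))] at h1
        exact h1
      obtain ⟨ihd, ihg⟩ := ih dp' hd' hndtl hkstl
      have hg3' : ∀ (k' : Nat), (k' : Int) ∈ ks →
          pvGet3 dp' 1 (jN : Int) (k' : Int) = pvGet3 dp 1 (jN : Int) (k' : Int) := by
        intro k' hk'
        rw [(by norm_num : (1:Int) = ((1:Nat):Int)), hstep 1 jN k', if_neg (by
          intro hcon
          exact hk0nin ((by omega : k0 = ((k' : Nat) : Int)) ▸ hk'))]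
      have hg0' : ∀ (k' : Nat),
          pvGet3 dp' 0 (k' : Int) 0 = pvGet3 dp 0 (k' : Int) 0 := by
        intro k'
        rw [(by norm_num : (0:Int) = ((0:Nat):Int)), hstep 0 k' 0, if_neg (by omega)]
      constructor
      · simpa only [List.foldl_cons, if_neg (not_not_intro g1), if_pos g2] using ihd
      · intro i' j' k'
        simp only [List.foldl_cons, if_neg (not_not_intro g1), if_pos g2]
        rw [ihg i' j' k']
        by_cases htgt : i' = 1 ∧ j' = jN ∧ ((k' : Int) ∈ ks ∧
            PySem.Int.band (pvIx states (k' : Int)) (pvIx mountains 0) = 0 ∧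
            PySem.Int.band (pvIx states (jN : Int)) (pvIx states (k' : Int)) = 0)
        · rw [if_pos htgt, if_pos ⟨htgt.1, htgt.2.1, by simp [htgt.2.2.1], htgt.2.2.2⟩,
            hg3' k' htgt.2.2.1, hg0' k']
        · rw [if_neg htgt]
          by_cases hk'k0 : (k' : Int) = k0 ∧ i' = 1 ∧ j' = jN
          · obtain ⟨he, hei, hej⟩ := hk'k0
            rw [hstep i' j' k', if_pos ⟨hei, hej, by omega⟩,
              if_pos ⟨hei, hej, by simp [he], by rw [he]; exact g1, by rw [he]; exact g2⟩]
            rw [he]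
          · rw [hstep i' j' k', if_neg (by
              intro hcon
              exact hk'k0 ⟨by omega, hcon.1, hcon.2.1⟩), if_neg (by
              intro hcon
              rcases List.mem_cons.mp hcon.2.2.1 with h | h
              · exact hk'k0 ⟨h, hcon.1, hcon.2.1⟩
              · exact htgt ⟨hcon.1, hcon.2.1, h, hcon.2.2.2⟩)]
    · have hstep0 : (if ¬ PySem.Int.band (pvIx states k0) (pvIx mountains 0) = 0 then dp else
          if PySem.Int.band (pvIx states (jN : Int)) (pvIx states k0) = 0 then
            pvSet3 dp 1 (jN : Int) k0
              (max (pvGet3 dp 1 (jN : Int) k0) (pvGet3 dp 0 k0 0 + pvIx counts (jN : Int)))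
          else dp) = dp := by
        by_cases c1 : PySem.Int.band (pvIx states k0) (pvIx mountains 0) = 0 <;>
          by_cases c2 : PySem.Int.band (pvIx states (jN : Int)) (pvIx states k0) = 0 <;>
          simp [c1, c2] <;> tauto
      obtain ⟨ihd, ihg⟩ := ih dp hd hndtl hkstl
      constructor
      · simpa only [List.foldl_cons, hstep0] using ihd
      · intro i' j' k'
        simp only [List.foldl_cons, hstep0]
        rw [ihg i' j' k']
        by_cases htgt : i' = 1 ∧ j' = jN ∧ ((k' : Int) ∈ ks ∧
            PySem.Int.band (pvIx states (k' : Int)) (pvIx mountains 0) = 0 ∧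
            PySem.Int.band (pvIx states (jN : Int)) (pvIx states (k' : Int)) = 0)
        · rw [if_pos htgt, if_pos ⟨htgt.1, htgt.2.1, by simp [htgt.2.2.1], htgt.2.2.2⟩]
        · rw [if_neg htgt, if_neg (by
            intro hcon
            rcases List.mem_cons.mp hcon.2.2.1 with h | h
            · exact hG (h ▸ ⟨hcon.2.2.2.1, hcon.2.2.2.2⟩)
            · exact htgt ⟨hcon.1, hcon.2.1, h, hcon.2.2.2⟩)]

lemma pv_j1loop (states counts mountains : List Int) (NN : Nat) (hNN : 1 < NN) :
    ∀ (js : List Int) (dp : List (List (List Int))), pvDims dp NN states.length →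
      js.Nodup → (∀ j ∈ js, 0 ≤ j ∧ j < (states.length : Int)) →
    pvDims (js.foldl (fun dp j =>
        if ¬ PySem.Int.band (pvIx states j) (pvIx mountains 1) = 0 then dp else
        (PySem.List.pyRange 0 (PySem.List.len states) 1).foldl (fun dp k =>
          if ¬ PySem.Int.band (pvIx states k) (pvIx mountains 0) = 0 then dp else
          if PySem.Int.band (pvIx states j) (pvIx states k) = 0 then
            pvSet3 dp 1 j k
              (max (pvGet3 dp 1 j k) (pvGet3 dp 0 k 0 + pvIx counts j))
          else dp) dp) dp) NN states.length
    ∧ ∀ (i' j' k' : Nat),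
      pvGet3 (js.foldl (fun dp j =>
        if ¬ PySem.Int.band (pvIx states j) (pvIx mountains 1) = 0 then dp else
        (PySem.List.pyRange 0 (PySem.List.len states) 1).foldl (fun dp k =>
          if ¬ PySem.Int.band (pvIx states k) (pvIx mountains 0) = 0 then dp else
          if PySem.Int.band (pvIx states j) (pvIx states k) = 0 then
            pvSet3 dp 1 j k
              (max (pvGet3 dp 1 j k) (pvGet3 dp 0 k 0 + pvIx counts j))
          else dp) dp) dp) (i' : Int) (j' : Int) (k' : Int)
      = if i' = 1 ∧ ((j' : Int) ∈ js ∧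
            PySem.Int.band (pvIx states (j' : Int)) (pvIx mountains 1) = 0) ∧
          ((k' : Int) ∈ PySem.List.pyRange 0 (PySem.List.len states) 1 ∧
            PySem.Int.band (pvIx states (k' : Int)) (pvIx mountains 0) = 0 ∧
            PySem.Int.band (pvIx states (j' : Int)) (pvIx states (k' : Int)) = 0) then
          max (pvGet3 dp 1 (j' : Int) (k' : Int))
            (pvGet3 dp 0 (k' : Int) 0 + pvIx counts (j' : Int))
        else pvGet3 dp (i' : Int) (j' : Int) (k' : Int) := by
  intro js
  induction js with
  | nil =>
    intro dp hd _ _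
    refine ⟨hd, ?_⟩
    intro i' j' k'
    simp only [List.foldl_nil, List.not_mem_nil, false_and, and_false, false_and, if_false]
  | cons j0 js ih =>
    intro dp hd hnd hjs
    obtain ⟨hj00, hj0S⟩ := hjs j0 (by simp)
    have hj0N : j0 = ((j0.toNat : Nat) : Int) := by omega
    have hj0nin : j0 ∉ js := (List.nodup_cons.mp hnd).1
    have hndtl : js.Nodup := (List.nodup_cons.mp hnd).2
    have hjstl : ∀ j ∈ js, 0 ≤ j ∧ j < (states.length : Int) := fun j hj => hjs j (by simp [hj])
    by_cases hG : PySem.Int.band (pvIx states j0) (pvIx mountains 1) = 0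
    · have hrangeN : (PySem.List.pyRange 0 (PySem.List.len states) 1).Nodup :=
        PySem.List.nodup_pyRange_one _ _
      have hrangeB : ∀ k ∈ PySem.List.pyRange 0 (PySem.List.len states) 1,
          0 ≤ k ∧ k < (states.length : Int) := by
        intro k hk
        rw [PySem.List.len_eq, PySem.List.mem_pyRange_one] at hk
        exact ⟨hk.1, by exact_mod_cast hk.2⟩
      have hkk := pv_k1loop states counts mountains NN hNN j0.toNat (by omega)
        (PySem.List.pyRange 0 (PySem.List.len states) 1) dp hd hrangeN hrangeB
      rw [← hj0N] at hkk
      obtain ⟨hd', hg'⟩ := hkk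
      set dp' := (PySem.List.pyRange 0 (PySem.List.len states) 1).foldl (fun dp k =>
          if ¬ PySem.Int.band (pvIx states k) (pvIx mountains 0) = 0 then dp else
          if PySem.Int.band (pvIx states j0) (pvIx states k) = 0 then
            pvSet3 dp 1 j0 k
              (max (pvGet3 dp 1 j0 k) (pvGet3 dp 0 k 0 + pvIx counts j0))
          else dp) dp with hdp'
      obtain ⟨ihd, ihg⟩ := ih dp' hd' hndtl hjstl
      have hget' : ∀ (i' j' k' : Nat), ¬ (i' = 1 ∧ (j' : Int) = j0) →
          pvGet3 dp' (i' : Int) (j' : Int) (k' : Int) = pvGet3 dp (i' : Int) (j' : Int) (k' : Int) := by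
        intro i' j' k' hne
        rw [hg' i' j' k', if_neg (by
          intro hcon
          exact hne ⟨hcon.1, by omega⟩)]
      constructor
      · simpa only [List.foldl_cons, if_neg (not_not_intro hG)] using ihd
      · intro i' j' k'
        simp only [List.foldl_cons, if_neg (not_not_intro hG)]
        rw [ihg i' j' k']
        by_cases htgt : i' = 1 ∧ ((j' : Int) ∈ js ∧
            PySem.Int.band (pvIx states (j' : Int)) (pvIx mountains 1) = 0) ∧
          ((k' : Int) ∈ PySem.List.pyRange 0 (PySem.List.len states) 1 ∧
            PySem.Int.band (pvIx states (k' : Int)) (pvIx mountains 0) = 0 ∧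
            PySem.Int.band (pvIx states (j' : Int)) (pvIx states (k' : Int)) = 0)
        · have hj'j0 : ¬ ((j' : Int) = j0) := fun h => hj0nin (h ▸ htgt.2.1.1)
          rw [if_pos htgt, if_pos ⟨htgt.1, ⟨by simp [htgt.2.1.1], htgt.2.1.2⟩, htgt.2.2⟩]
          have h1 : pvGet3 dp' 1 (j' : Int) (k' : Int) = pvGet3 dp 1 (j' : Int) (k' : Int) := by
            rw [(by norm_num : (1:Int) = ((1:Nat):Int))]
            exact hget' 1 j' k' (by tauto)
          have h0 : pvGet3 dp' 0 (k' : Int) 0 = pvGet3 dp 0 (k' : Int) 0 := by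
            rw [(by norm_num : (0:Int) = ((0:Nat):Int))]
            exact hget' 0 k' 0 (by omega)
          rw [h1, h0]
        · rw [if_neg htgt]
          by_cases hj'j0 : (j' : Int) = j0 ∧ i' = 1
          · obtain ⟨he, hei⟩ := hj'j0
            by_cases hkc : ((k' : Int) ∈ PySem.List.pyRange 0 (PySem.List.len states) 1 ∧
                PySem.Int.band (pvIx states (k' : Int)) (pvIx mountains 0) = 0 ∧
                PySem.Int.band (pvIx states (j' : Int)) (pvIx states (k' : Int)) = 0)
            · rw [hg' i' j' k', if_pos ⟨hei, by omega,
                ⟨hkc.1, hkc.2.1, by rw [← he]; exact hkc.2.2⟩⟩,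
                if_pos ⟨hei, ⟨by simp [he], by rw [he]; exact hG⟩, hkc⟩]
              rw [he]
            · rw [hg' i' j' k', if_neg (by
                intro hcon
                exact hkc ⟨hcon.2.2.1, hcon.2.2.2.1, by rw [he]; exact hcon.2.2.2.2⟩),
                if_neg (by
                intro hcon
                exact hkc hcon.2.2)]
          · rw [hget' i' j' k' (by tauto), if_neg (by
              intro hcon
              rcases List.mem_cons.mp hcon.2.1.1 with h | h
              · exact (by tauto : ¬ ((j' : Int) = j0 ∧ i' = 1)) ⟨h, hcon.1⟩
              · exact htgt ⟨hcon.1, ⟨h, hcon.2.1.2⟩, hcon.2.2⟩)]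
    · have hstep0 : (if ¬ PySem.Int.band (pvIx states j0) (pvIx mountains 1) = 0 then dp else
          (PySem.List.pyRange 0 (PySem.List.len states) 1).foldl (fun dp k =>
            if ¬ PySem.Int.band (pvIx states k) (pvIx mountains 0) = 0 then dp else
            if PySem.Int.band (pvIx states j0) (pvIx states k) = 0 then
              pvSet3 dp 1 j0 k
                (max (pvGet3 dp 1 j0 k) (pvGet3 dp 0 k 0 + pvIx counts j0))
            else dp) dp) = dp := by
        rw [if_pos hG]
      obtain ⟨ihd, ihg⟩ := ih dp hd hndtl hjstl
      constructor
      · simpa only [List.foldl_cons, hstep0] using ihd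
      · intro i' j' k'
        simp only [List.foldl_cons, hstep0]
        rw [ihg i' j' k']
        by_cases htgt : i' = 1 ∧ ((j' : Int) ∈ js ∧
            PySem.Int.band (pvIx states (j' : Int)) (pvIx mountains 1) = 0) ∧
          ((k' : Int) ∈ PySem.List.pyRange 0 (PySem.List.len states) 1 ∧
            PySem.Int.band (pvIx states (k' : Int)) (pvIx mountains 0) = 0 ∧
            PySem.Int.band (pvIx states (j' : Int)) (pvIx states (k' : Int)) = 0)
        · rw [if_pos htgt, if_pos ⟨htgt.1, ⟨by simp [htgt.2.1.1], htgt.2.1.2⟩, htgt.2.2⟩]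
        · rw [if_neg htgt, if_neg (by
            intro hcon
            rcases List.mem_cons.mp hcon.2.1.1 with h | h
            · exact hG (h ▸ hcon.2.1.2)
            · exact htgt ⟨hcon.1, ⟨h, hcon.2.1.2⟩, hcon.2.2⟩)]

def pvInv (m : Int) (mountains : List Int) (NN r : Nat) (dp : List (List (List Int))) : Prop :=
  pvDims dp NN (pvStates m).1.length ∧
  ∀ (i' j' k' : Nat), j' < (pvStates m).1.length → k' < (pvStates m).1.length →
    pvGet3 dp (i' : Int) (j' : Int) (k' : Int)
      = if i' ≤ r then
          pvL (pvStates m).1 (pvStates m).2 mountains i' (j' : Int) (k' : Int)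
        else 0

lemma pv_fold_filter_max (ls : List Int) (C : Int → Prop) [DecidablePred C] (v : Int → Int)
    (hv : ∀ l ∈ ls, C l → 0 ≤ v l) :
    ls.foldl (fun a l => if C l then max a (v l) else a) 0
      = PySem.List.maxD ((ls.filter (fun l => decide (C l))).map v) id 0 := by
  have h1 : ls.foldl (fun a l => if C l then max a (v l) else a) 0
      = ls.foldl (fun x y => if (fun l => decide (C l)) y = true then max x (v y) else x) 0 :=
    PySem.List.foldl_congr_mem ls _ _ 0 (by
      intro acc x _
      by_cases h : C x <;> simp [h])
  rw [h1, ← List.foldl_filter, ← List.foldl_map, pv_maxD_eq_foldl]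
  intro x hx
  simp only [List.mem_map, List.mem_filter, decide_eq_true_eq] at hx
  obtain ⟨l, ⟨hl, hCl⟩, rfl⟩ := hx
  exact hv l hl hCl

lemma pv_dp0 (n : Int) (states : List Int) :
    pvDims ((PySem.List.pyRange 0 n 1).map (fun _ =>
        (PySem.List.pyRange 0 (PySem.List.len states) 1).map (fun _ =>
          List.replicate (PySem.List.len states).toNat (0:Int)))) n.toNat states.length
    ∧ ∀ (i' j' k' : Nat),
        pvGet3 ((PySem.List.pyRange 0 n 1).map (fun _ =>
          (PySem.List.pyRange 0 (PySem.List.len states) 1).map (fun _ =>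
            List.replicate (PySem.List.len states).toNat (0:Int)))) (i' : Int) (j' : Int) (k' : Int) = 0 := by
  constructor
  · refine ⟨by simp [PySem.List.length_pyRange_one], ?_⟩
    intro row hrow
    simp only [List.mem_map] at hrow
    obtain ⟨_, _, rfl⟩ := hrow
    refine ⟨by simp [PySem.List.length_pyRange_one, PySem.List.len_eq], ?_⟩
    intro r hr
    simp only [List.mem_map] at hr
    obtain ⟨_, _, rfl⟩ := hr
    simp [PySem.List.len_eq]
  · intro i' j' k'
    unfold pvGet3
    simp only [PySem.List.pyGetD_natCast]
    set dp0 := (PySem.List.pyRange 0 n 1).map (fun _ =>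
        (PySem.List.pyRange 0 (PySem.List.len states) 1).map (fun _ =>
          List.replicate (PySem.List.len states).toNat (0:Int))) with hdp0
    rcases pv_getD_cases dp0 i' [] with h | h
    · rw [h]; simp
    · rw [hdp0] at h
      simp only [List.mem_map] at h
      obtain ⟨_, _, hrow⟩ := h
      rw [← hrow]
      rcases pv_getD_cases ((PySem.List.pyRange 0 (PySem.List.len states) 1).map (fun _ =>
          List.replicate (PySem.List.len states).toNat (0:Int))) j' [] with h2 | h2
      · rw [h2]; simp
      · simp only [List.mem_map] at h2
        obtain ⟨_, _, hr⟩ := h2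
        rw [← hr]
        rcases pv_getD_cases (List.replicate (PySem.List.len states).toNat (0:Int)) k' 0 with h3 | h3
        · rw [h3]
        · exact List.eq_of_mem_replicate h3

lemma pv_range_nodup_bounds (states : List Int) :
    (PySem.List.pyRange 0 (PySem.List.len states) 1).Nodup ∧
    (∀ j ∈ PySem.List.pyRange 0 (PySem.List.len states) 1, 0 ≤ j ∧ j < (states.length : Int)) := by
  refine ⟨PySem.List.nodup_pyRange_one _ _, ?_⟩
  intro j hj
  rw [PySem.List.len_eq, PySem.List.mem_pyRange_one] at hj
  exact ⟨hj.1, hj.2⟩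

lemma pv_inv_base (m : Int) (hm : 0 < m) (mountains : List Int) (NN : Nat) (hNN : 0 < NN)
    (dp : List (List (List Int))) (hd : pvDims dp NN (pvStates m).1.length)
    (hz : ∀ (i' j' k' : Nat), pvGet3 dp (i' : Int) (j' : Int) (k' : Int) = 0) :
    pvInv m mountains NN 0
      ((PySem.List.pyRange 0 (PySem.List.len (pvStates m).1) 1).foldl (fun dp j =>
        if PySem.Int.band (pvIx (pvStates m).1 j) (pvIx mountains 0) = 0 then
          pvSet3 dp 0 j 0 (pvIx (pvStates m).2 j)
        else dp) dp) := by
  obtain ⟨hrn, hrb⟩ := pv_range_nodup_bounds (pvStates m).1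
  have hS : 0 < (pvStates m).1.length := pv_states_len_pos m hm
  obtain ⟨hd', hg'⟩ := pv_row0 (pvStates m).1 (pvStates m).2 mountains NN hNN hS
    (PySem.List.pyRange 0 (PySem.List.len (pvStates m).1) 1) dp hd hrn hrb
  refine ⟨hd', ?_⟩
  intro i' j' k' hj' hk'
  rw [hg' i' j' k']
  have hmem : (j' : Int) ∈ PySem.List.pyRange 0 (PySem.List.len (pvStates m).1) 1 := by
    rw [PySem.List.len_eq, PySem.List.mem_pyRange_one]
    constructor <;> omega
  by_cases hi0 : i' = 0
  · subst hi0
    rw [if_pos (by omega : (0:Nat) ≤ 0)]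
    unfold pvL
    by_cases hcond : (k' : Int) = 0 ∧
        PySem.Int.band (pvIx (pvStates m).1 (j' : Int)) (pvIx mountains 0) = 0
    · rw [if_pos ⟨rfl, ⟨hmem, hcond.2⟩, by omega⟩, if_pos hcond]
    · rw [if_neg (by
        intro hcon
        exact hcond ⟨by omega, hcon.2.1.2⟩), if_neg hcond, hz 0 j' k']
  · rw [if_neg (by tauto), if_neg (by omega), hz i' j' k']

lemma pv_maxD_singleton (x : Int) : PySem.List.maxD [x] id 0 = x := rfl

lemma pv_lval1 (m : Int) (hm : 0 < m) (counts mountains : List Int) (j k : Int)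
    (hg : PySem.Int.band (pvIx (pvStates m).1 j) (pvIx mountains (((0:Nat) : Int) + 1)) = 0 ∧
      PySem.Int.band (pvIx (pvStates m).1 k) (pvIx mountains (((0:Nat) : Int) + 1 - 1)) = 0 ∧
      PySem.Int.band (pvIx (pvStates m).1 j) (pvIx (pvStates m).1 k) = 0) :
    pvL (pvStates m).1 counts mountains 1 j k
      = pvL (pvStates m).1 counts mountains 0 k 0 + pvIx counts j := by
  show pvL (pvStates m).1 counts mountains (0 + 1) j k = _
  unfold pvL
  rw [if_pos hg, pv_filter_l0 m hm mountains j k, List.map_cons, List.map_nil, pv_maxD_singleton]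
  rfl

lemma pv_inv_row1 (m : Int) (hm : 0 < m) (mountains : List Int) (NN : Nat) (hNN : 1 < NN)
    (dp : List (List (List Int))) (hinv : pvInv m mountains NN 0 dp) :
    pvInv m mountains NN 1
      ((PySem.List.pyRange 0 (PySem.List.len (pvStates m).1) 1).foldl (fun dp j =>
        if ¬ PySem.Int.band (pvIx (pvStates m).1 j) (pvIx mountains 1) = 0 then dp else
        (PySem.List.pyRange 0 (PySem.List.len (pvStates m).1) 1).foldl (fun dp k =>
          if ¬ PySem.Int.band (pvIx (pvStates m).1 k) (pvIx mountains 0) = 0 then dp else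
          if PySem.Int.band (pvIx (pvStates m).1 j) (pvIx (pvStates m).1 k) = 0 then
            pvSet3 dp 1 j k
              (max (pvGet3 dp 1 j k) (pvGet3 dp 0 k 0 + pvIx (pvStates m).2 j))
          else dp) dp) dp) := by
  obtain ⟨hd, hg⟩ := hinv
  obtain ⟨hrn, hrb⟩ := pv_range_nodup_bounds (pvStates m).1
  have hS : 0 < (pvStates m).1.length := pv_states_len_pos m hm
  have hc : ∀ (j : Int), 0 ≤ pvIx (pvStates m).2 j := pv_counts_nonneg m
  obtain ⟨hd', hg'⟩ := pv_j1loop (pvStates m).1 (pvStates m).2 mountains NN hNN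
    (PySem.List.pyRange 0 (PySem.List.len (pvStates m).1) 1) dp hd hrn hrb
  refine ⟨hd', ?_⟩
  intro i' j' k' hj' hk'
  rw [hg' i' j' k']
  have hmemj : (j' : Int) ∈ PySem.List.pyRange 0 (PySem.List.len (pvStates m).1) 1 := by
    rw [PySem.List.len_eq, PySem.List.mem_pyRange_one]; constructor <;> omega
  have hmemk : (k' : Int) ∈ PySem.List.pyRange 0 (PySem.List.len (pvStates m).1) 1 := by
    rw [PySem.List.len_eq, PySem.List.mem_pyRange_one]; constructor <;> omega
  have hcast0 : ((0:Nat) : Int) + 1 = (1 : Int) := by norm_num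
  have hcast00 : ((0:Nat) : Int) + 1 - 1 = (0 : Int) := by norm_num
  by_cases hi1 : i' = 1
  · subst hi1
    rw [if_pos (le_refl 1)]
    by_cases hcond : PySem.Int.band (pvIx (pvStates m).1 (j' : Int)) (pvIx mountains 1) = 0 ∧
        PySem.Int.band (pvIx (pvStates m).1 (k' : Int)) (pvIx mountains 0) = 0 ∧
        PySem.Int.band (pvIx (pvStates m).1 (j' : Int)) (pvIx (pvStates m).1 (k' : Int)) = 0
    · rw [if_pos ⟨rfl, ⟨hmemj, hcond.1⟩, hmemk, hcond.2.1, hcond.2.2⟩]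
      have hstart : pvGet3 dp 1 (j' : Int) (k' : Int) = 0 := by
        rw [(by norm_num : (1:Int) = ((1:Nat):Int)), hg 1 j' k' hj' hk', if_neg (by omega)]
      have hread : pvGet3 dp 0 (k' : Int) 0
          = pvL (pvStates m).1 (pvStates m).2 mountains 0 (k' : Int) 0 := by
        rw [(by norm_num : (0:Int) = ((0:Nat):Int)), hg 0 k' 0 hk' hS, if_pos (le_refl 0)]
      have hnn : 0 ≤ pvL (pvStates m).1 (pvStates m).2 mountains 0 (k' : Int) 0
            + pvIx (pvStates m).2 (j' : Int) := by
        have h1 := pvL_nonneg (pvStates m).1 (pvStates m).2 mountains hc 0 (k' : Int) 0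
        have h2 := hc (j' : Int)
        omega
      rw [hstart, hread, show pvL (pvStates m).1 (pvStates m).2 mountains 1 (j' : Int) (k' : Int)
        = pvL (pvStates m).1 (pvStates m).2 mountains 0 (k' : Int) 0
            + pvIx (pvStates m).2 (j' : Int) from
          pv_lval1 m hm (pvStates m).2 mountains (j' : Int) (k' : Int)
            (by rw [hcast00, hcast0]; exact ⟨hcond.1, hcond.2.1, hcond.2.2⟩)]
      exact max_eq_right hnn
    · rw [if_neg (by
        intro hcon
        exact hcond ⟨hcon.2.1.2, hcon.2.2.2.1, hcon.2.2.2.2⟩)]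
      rw [hg 1 j' k' hj' hk', if_neg (by omega)]
      show (0:Int) = pvL (pvStates m).1 (pvStates m).2 mountains (0 + 1) (j' : Int) (k' : Int)
      unfold pvL
      rw [if_neg (by
        intro hcon
        exact hcond ⟨by rw [← hcast0]; exact hcon.1, by rw [← hcast00]; exact hcon.2.1, hcon.2.2⟩)]
  · rw [if_neg (by tauto), hg i' j' k' hj' hk']
    rcases Nat.lt_or_ge i' 1 with h | h
    · rw [if_pos (by omega), if_pos (by omega)]
    · rw [if_neg (by omega), if_neg (by omega)]

lemma pv_inv_step (m : Int) (hm : 0 < m) (mountains : List Int) (NN : Nat) (r : Nat)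
    (i : Int) (hieq : i = (r : Int) + 1)
    (hr1 : 1 ≤ r) (hrNN : r + 1 < NN) (dp : List (List (List Int)))
    (hinv : pvInv m mountains NN r dp) :
    pvInv m mountains NN (r + 1)
      ((PySem.List.pyRange 0 (PySem.List.len (pvStates m).1) 1).foldl (fun dp j =>
        if ¬ PySem.Int.band (pvIx (pvStates m).1 j) (pvIx mountains i) = 0 then dp else
        (PySem.List.pyRange 0 (PySem.List.len (pvStates m).1) 1).foldl (fun dp k =>
          if ¬ PySem.Int.band (pvIx (pvStates m).1 k) (pvIx mountains (i - 1)) = 0 then dp else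
          if ¬ PySem.Int.band (pvIx (pvStates m).1 j) (pvIx (pvStates m).1 k) = 0 then dp else
          (PySem.List.pyRange 0 (PySem.List.len (pvStates m).1) 1).foldl (fun dp l =>
            if ¬ PySem.Int.band (pvIx (pvStates m).1 l) (pvIx mountains (i - 2)) = 0 then dp else
            if ¬ PySem.Int.band (pvIx (pvStates m).1 j) (pvIx (pvStates m).1 l) = 0 then dp else
            if ¬ PySem.Int.band (pvIx (pvStates m).1 k) (pvIx (pvStates m).1 l) = 0 then dp else
            pvSet3 dp i j k
              (max (pvGet3 dp i j k)
                (pvGet3 dp (i - 1) k l + pvIx (pvStates m).2 j))) dp) dp) dp) := by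
  subst hieq
  obtain ⟨hd, hg⟩ := hinv
  obtain ⟨hrn, hrb⟩ := pv_range_nodup_bounds (pvStates m).1
  have hS : 0 < (pvStates m).1.length := pv_states_len_pos m hm
  have hc : ∀ (j : Int), 0 ≤ pvIx (pvStates m).2 j := pv_counts_nonneg m
  have hjl := pv_jloop (pvStates m).1 (pvStates m).2 mountains NN (r + 1) (by omega) hrNN
    (PySem.List.pyRange 0 (PySem.List.len (pvStates m).1) 1) dp hd hrn hrb
  simp only [Nat.cast_add, Nat.cast_one] at hjl
  obtain ⟨hd', hg'⟩ := hjl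
  refine ⟨hd', ?_⟩
  intro i' j' k' hj' hk'
  rw [hg' i' j' k']
  have hmemj : (j' : Int) ∈ PySem.List.pyRange 0 (PySem.List.len (pvStates m).1) 1 := by
    rw [PySem.List.len_eq, PySem.List.mem_pyRange_one]; constructor <;> omega
  have hmemk : (k' : Int) ∈ PySem.List.pyRange 0 (PySem.List.len (pvStates m).1) 1 := by
    rw [PySem.List.len_eq, PySem.List.mem_pyRange_one]; constructor <;> omega
  have hstart : ∀ (j'' k'' : Nat), j'' < (pvStates m).1.length → k'' < (pvStates m).1.length →
      pvGet3 dp ((r : Int) + 1) (j'' : Int) (k'' : Int) = 0 := by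
    intro j'' k'' h1 h2
    have h3 := hg (r + 1) j'' k'' h1 h2
    simp only [Nat.cast_add, Nat.cast_one] at h3
    rw [h3, if_neg (by omega)]
  have h2i : (2:Int) ≤ (r : Int) + 1 := by omega
  by_cases hi : i' = r + 1
  · subst hi
    rw [if_pos (le_refl _)]
    have hLrhs : pvL (pvStates m).1 (pvStates m).2 mountains (r + 1) (j' : Int) (k' : Int)
        = if PySem.Int.band (pvIx (pvStates m).1 (j' : Int)) (pvIx mountains ((r : Int) + 1)) = 0 ∧
            PySem.Int.band (pvIx (pvStates m).1 (k' : Int)) (pvIx mountains ((r : Int) + 1 - 1)) = 0 ∧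
            PySem.Int.band (pvIx (pvStates m).1 (j' : Int)) (pvIx (pvStates m).1 (k' : Int)) = 0 then
          PySem.List.maxD
            (((PySem.List.pyRange 0 (PySem.List.len (pvStates m).1) 1).filter (fun l =>
                decide ((if 2 ≤ (r : Int) + 1 then
                    PySem.Int.band (pvIx (pvStates m).1 l) (pvIx mountains ((r : Int) + 1 - 2)) = 0
                  else l = 0) ∧
                  PySem.Int.band (pvIx (pvStates m).1 (j' : Int)) (pvIx (pvStates m).1 l) = 0 ∧
                  PySem.Int.band (pvIx (pvStates m).1 (k' : Int)) (pvIx (pvStates m).1 l) = 0))).map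
              (fun l => pvL (pvStates m).1 (pvStates m).2 mountains r (k' : Int) l
                + pvIx (pvStates m).2 (j' : Int)))
            id 0
        else 0 := rfl
    have hfeq : (fun l =>
          decide ((if 2 ≤ (r : Int) + 1 then
              PySem.Int.band (pvIx (pvStates m).1 l) (pvIx mountains ((r : Int) + 1 - 2)) = 0
            else l = 0) ∧
            PySem.Int.band (pvIx (pvStates m).1 (j' : Int)) (pvIx (pvStates m).1 l) = 0 ∧
            PySem.Int.band (pvIx (pvStates m).1 (k' : Int)) (pvIx (pvStates m).1 l) = 0))
        = (fun l =>
          decide (PySem.Int.band (pvIx (pvStates m).1 l) (pvIx mountains ((r : Int) + 1 - 2)) = 0 ∧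
            PySem.Int.band (pvIx (pvStates m).1 (j' : Int)) (pvIx (pvStates m).1 l) = 0 ∧
            PySem.Int.band (pvIx (pvStates m).1 (k' : Int)) (pvIx (pvStates m).1 l) = 0)) :=
      funext fun l => decide_eq_decide.mpr (by rw [if_pos h2i])
    rw [hLrhs, hfeq]
    by_cases hcond : PySem.Int.band (pvIx (pvStates m).1 (j' : Int)) (pvIx mountains ((r : Int) + 1)) = 0 ∧
        PySem.Int.band (pvIx (pvStates m).1 (k' : Int)) (pvIx mountains ((r : Int) + 1 - 1)) = 0 ∧
        PySem.Int.band (pvIx (pvStates m).1 (j' : Int)) (pvIx (pvStates m).1 (k' : Int)) = 0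
    · rw [if_pos ⟨rfl, ⟨hmemj, hcond.1⟩, hmemk, hcond.2.1, hcond.2.2⟩, if_pos hcond]
      rw [hstart j' k' hj' hk']
      have hcongr : (PySem.List.pyRange 0 (PySem.List.len (pvStates m).1) 1).foldl (fun a l =>
          if PySem.Int.band (pvIx (pvStates m).1 l) (pvIx mountains ((r : Int) + 1 - 2)) = 0 ∧
              PySem.Int.band (pvIx (pvStates m).1 (j' : Int)) (pvIx (pvStates m).1 l) = 0 ∧
              PySem.Int.band (pvIx (pvStates m).1 (k' : Int)) (pvIx (pvStates m).1 l) = 0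
          then max a (pvGet3 dp ((r : Int) + 1 - 1) (k' : Int) l + pvIx (pvStates m).2 (j' : Int))
          else a) 0
          = (PySem.List.pyRange 0 (PySem.List.len (pvStates m).1) 1).foldl (fun a l =>
          if PySem.Int.band (pvIx (pvStates m).1 l) (pvIx mountains ((r : Int) + 1 - 2)) = 0 ∧
              PySem.Int.band (pvIx (pvStates m).1 (j' : Int)) (pvIx (pvStates m).1 l) = 0 ∧
              PySem.Int.band (pvIx (pvStates m).1 (k' : Int)) (pvIx (pvStates m).1 l) = 0
          then max a (pvL (pvStates m).1 (pvStates m).2 mountains r (k' : Int) l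
              + pvIx (pvStates m).2 (j' : Int))
          else a) 0 := by
        refine PySem.List.foldl_congr_mem _ _ _ _ ?_
        intro acc l hl
        have hlb := hrb l hl
        have hread : pvGet3 dp ((r : Int) + 1 - 1) (k' : Int) l
            = pvL (pvStates m).1 (pvStates m).2 mountains r (k' : Int) l := by
          have h4 := hg r k' l.toNat hk' (by omega)
          rw [show ((r : Int) + 1 - 1) = ((r : Nat) : Int) by push_cast; ring,
            show l = ((l.toNat : Nat) : Int) by omega, h4, if_pos (le_refl r)]
        rw [hread]
      rw [hcongr, pv_fold_filter_max _ _ _ (by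
        intro l _ _
        have h1 := pvL_nonneg (pvStates m).1 (pvStates m).2 mountains hc r (k' : Int) l
        have h2 := hc (j' : Int)
        omega)]
    · rw [if_neg (by
        intro hcon
        exact hcond ⟨hcon.2.1.2, hcon.2.2.2.1, hcon.2.2.2.2⟩), if_neg hcond,
        show (((r + 1 : Nat) : Nat) : Int) = (r : Int) + 1 by push_cast; ring,
        hstart j' k' hj' hk']
  · rw [if_neg (by tauto), hg i' j' k' hj' hk']
    rcases Nat.lt_or_ge i' (r + 1) with h | h
    · rw [if_pos (by omega), if_pos (by omega)]
    · rw [if_neg (by omega), if_neg (by omega)]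

lemma pv_mainfold (m : Int) (hm : 0 < m) (mountains : List Int) (NN : Nat) :
    ∀ (t : Nat) (b : Int), b = (t : Int) + 2 → t + 2 ≤ NN →
    ∀ (dp : List (List (List Int))), pvInv m mountains NN 1 dp →
    pvInv m mountains NN (t + 1)
      ((PySem.List.pyRange 2 b 1).foldl
        (pvStep2 (pvStates m).1 (pvStates m).2 mountains) dp) := by
  intro t
  induction t with
  | zero =>
    intro b hb hNN dp hinv
    subst hb
    rw [PySem.List.pyRange_one_eq_nil (by norm_num)]
    exact hinv
  | succ t ih =>
    intro b hb hNN dp hinv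
    subst hb
    have hsplit : PySem.List.pyRange 2 (((t + 1 : Nat) : Int) + 2) 1
        = PySem.List.pyRange 2 ((t : Int) + 2) 1 ++ [(t : Int) + 2] := by
      rw [show (((t + 1 : Nat) : Int) + 2) = (((t : Int) + 2) + 1) by push_cast; ring]
      exact PySem.List.pyRange_one_succ_right (by omega)
    rw [hsplit, List.foldl_append, List.foldl_cons, List.foldl_nil]
    have hprev := ih ((t : Int) + 2) rfl (by omega) dp hinv
    exact pv_inv_step m hm mountains NN (t + 1) ((t : Int) + 2)
      (by push_cast; ring) (by omega) (by omega) _ hprev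

lemma pv_ans (m : Int) (hm : 0 < m) (mountains : List Int) (NN r : Nat)
    (dp : List (List (List Int))) (hinv : pvInv m mountains NN r dp) (i : Int)
    (hi : i = (r : Int)) :
    (PySem.List.pyRange 0 (PySem.List.len (pvStates m).1) 1).foldl (fun a j =>
        (PySem.List.pyRange 0 (PySem.List.len (pvStates m).1) 1).foldl (fun a k =>
          max a (pvGet3 dp i j k)) a) 0
      = ((PySem.List.pyRange 0 (PySem.List.len (pvStates m).1) 1).flatMap (fun j =>
          (PySem.List.pyRange 0 (PySem.List.len (pvStates m).1) 1).map (fun k =>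
            pvL (pvStates m).1 (pvStates m).2 mountains r j k))).foldl max 0 := by
  subst hi
  obtain ⟨hd, hg⟩ := hinv
  obtain ⟨hrn, hrb⟩ := pv_range_nodup_bounds (pvStates m).1
  have hstep1 : (PySem.List.pyRange 0 (PySem.List.len (pvStates m).1) 1).foldl (fun a j =>
        (PySem.List.pyRange 0 (PySem.List.len (pvStates m).1) 1).foldl (fun a k =>
          max a (pvGet3 dp ((r : Nat) : Int) j k)) a) 0
      = (PySem.List.pyRange 0 (PySem.List.len (pvStates m).1) 1).foldl (fun a j =>
        (PySem.List.pyRange 0 (PySem.List.len (pvStates m).1) 1).foldl (fun a k =>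
          max a (pvL (pvStates m).1 (pvStates m).2 mountains r j k)) a) 0 := by
    refine PySem.List.foldl_congr_mem _ _ _ _ ?_
    intro acc j hj
    refine PySem.List.foldl_congr_mem _ _ _ _ ?_
    intro acc2 k hk
    have hjb := hrb j hj
    have hkb := hrb k hk
    have := hg r j.toNat k.toNat (by omega) (by omega)
    rw [show j = ((j.toNat : Nat) : Int) by omega, show k = ((k.toNat : Nat) : Int) by omega,
      this, if_pos (le_refl r)]
  rw [hstep1]
  exact pv_nested_max_flat _ _ _ 0

-- memoization machinery for B ---------------------------------------------------

-- every cached value is the DP value of its key (keys are the Int triples Python uses)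
def pvGood (states counts mountains : List Int)
    (memo : PySem.Dict (Int × Int × Int) Int) : Prop :=
  ∀ (i j k v : Int), memo.get? (i, j, k) = some v →
    0 ≤ i ∧ v = pvL states counts mountains i.toNat j k

lemma pvGood_empty (states counts mountains : List Int) :
    pvGood states counts mountains PySem.Dict.empty := by
  intro i j k v h
  rw [PySem.Dict.get?_empty] at h
  cases h

lemma pvGood_insert (states counts mountains : List Int)
    (memo : PySem.Dict (Int × Int × Int) Int) (hg : pvGood states counts mountains memo)
    (i j k v : Int) (hi : 0 ≤ i) (hv : v = pvL states counts mountains i.toNat j k) :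
    pvGood states counts mountains (memo.insert (i, j, k) v) := by
  intro i' j' k' w h
  rw [PySem.Dict.get?_insert] at h
  split at h
  next heq =>
    rw [Prod.ext_iff, Prod.ext_iff] at heq
    obtain ⟨h1, h2, h3⟩ := heq
    simp only at h1 h2 h3
    refine ⟨by omega, ?_⟩
    have hw : w = v := by
      injection h with h'
      exact h'.symm
    rw [hw, hv, h1, h2, h3]
  next => exact hg i' j' k' w h

lemma pvBest_eq (states counts mountains : List Int) :
    ∀ (iN : Nat) (j k : Int) (memo : PySem.Dict (Int × Int × Int) Int),
      pvGood states counts mountains memo →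
      (pvBest states counts mountains iN j k memo).1 = pvL states counts mountains iN j k ∧
      pvGood states counts mountains (pvBest states counts mountains iN j k memo).2 := by
  intro iN
  induction iN with
  | zero =>
    intro j k memo hg
    cases hget : memo.get? ((0 : Int), j, k) with
    | some v =>
      obtain ⟨_, hv⟩ := hg 0 j k v hget
      simp only [pvBest, hget]
      exact ⟨hv, hg⟩
    | none =>
      simp only [pvBest, hget]
      refine ⟨rfl, ?_⟩
      exact pvGood_insert states counts mountains memo hg 0 j k _ (le_refl 0) rfl
  | succ r ih =>
    intro j k memo hg
    have ht : ((r : Int) + 1).toNat = r + 1 := by omega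
    cases hget : memo.get? (((r : Int) + 1), j, k) with
    | some v =>
      obtain ⟨_, hv⟩ := hg ((r : Int) + 1) j k v hget
      simp only [pvBest, hget]
      refine ⟨?_, hg⟩
      rw [hv, ht]
    | none =>
      have inner : ∀ (ls : List Int) (acc : List Int)
          (mm : PySem.Dict (Int × Int × Int) Int), pvGood states counts mountains mm →
          ((ls.foldl (fun (p : List Int × PySem.Dict (Int × Int × Int) Int) l =>
              if (if 2 ≤ (r : Int) + 1 then
                    PySem.Int.band (pvIx states l) (pvIx mountains ((r : Int) + 1 - 2)) = 0
                  else l = 0) ∧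
                  PySem.Int.band (pvIx states j) (pvIx states l) = 0 ∧
                  PySem.Int.band (pvIx states k) (pvIx states l) = 0 then
                (p.1 ++ [(pvBest states counts mountains r k l p.2).1 + pvIx counts j],
                  (pvBest states counts mountains r k l p.2).2)
              else p) (acc, mm)).1
            = acc ++ (ls.filter (fun l =>
                decide ((if 2 ≤ (r : Int) + 1 then
                    PySem.Int.band (pvIx states l) (pvIx mountains ((r : Int) + 1 - 2)) = 0
                  else l = 0) ∧
                  PySem.Int.band (pvIx states j) (pvIx states l) = 0 ∧
                  PySem.Int.band (pvIx states k) (pvIx states l) = 0))).map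
                (fun l => pvL states counts mountains r k l + pvIx counts j))
          ∧ pvGood states counts mountains
              ((ls.foldl (fun (p : List Int × PySem.Dict (Int × Int × Int) Int) l =>
                if (if 2 ≤ (r : Int) + 1 then
                      PySem.Int.band (pvIx states l) (pvIx mountains ((r : Int) + 1 - 2)) = 0
                    else l = 0) ∧
                    PySem.Int.band (pvIx states j) (pvIx states l) = 0 ∧
                    PySem.Int.band (pvIx states k) (pvIx states l) = 0 then
                  (p.1 ++ [(pvBest states counts mountains r k l p.2).1 + pvIx counts j],
                    (pvBest states counts mountains r k l p.2).2)
                else p) (acc, mm)).2) := by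
        intro ls
        induction ls with
        | nil =>
          intro acc mm hmm
          exact ⟨by simp, hmm⟩
        | cons l0 ls ihl =>
          intro acc mm hmm
          by_cases hc : (if 2 ≤ (r : Int) + 1 then
                PySem.Int.band (pvIx states l0) (pvIx mountains ((r : Int) + 1 - 2)) = 0
              else l0 = 0) ∧
              PySem.Int.band (pvIx states j) (pvIx states l0) = 0 ∧
              PySem.Int.band (pvIx states k) (pvIx states l0) = 0
          · obtain ⟨hb1, hb2⟩ := ih k l0 mm hmm
            simp only [List.foldl_cons, if_pos hc]
            obtain ⟨h1, h2⟩ := ihl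
              (acc ++ [(pvBest states counts mountains r k l0 mm).1 + pvIx counts j])
              (pvBest states counts mountains r k l0 mm).2 hb2
            refine ⟨?_, h2⟩
            rw [h1, hb1, List.filter_cons_of_pos (by simpa using hc), List.map_cons]
            simp [List.append_assoc]
          · simp only [List.foldl_cons, if_neg hc]
            obtain ⟨h1, h2⟩ := ihl acc mm hmm
            refine ⟨?_, h2⟩
            rw [h1, List.filter_cons_of_neg (by simpa using hc)]
      simp only [pvBest, hget]
      by_cases hguard : PySem.Int.band (pvIx states j) (pvIx mountains ((r : Int) + 1)) = 0 ∧
          PySem.Int.band (pvIx states k) (pvIx mountains ((r : Int) + 1 - 1)) = 0 ∧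
          PySem.Int.band (pvIx states j) (pvIx states k) = 0
      · rw [if_pos hguard]
        obtain ⟨h1, h2⟩ := inner (PySem.List.pyRange 0 (PySem.List.len states) 1) [] memo hg
        have hpv : pvL states counts mountains (r + 1) j k
            = PySem.List.maxD
                (((PySem.List.pyRange 0 (PySem.List.len states) 1).filter (fun l =>
                    decide ((if 2 ≤ (r : Int) + 1 then
                        PySem.Int.band (pvIx states l) (pvIx mountains ((r : Int) + 1 - 2)) = 0
                      else l = 0) ∧
                      PySem.Int.band (pvIx states j) (pvIx states l) = 0 ∧
                      PySem.Int.band (pvIx states k) (pvIx states l) = 0))).map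
                  (fun l => pvL states counts mountains r k l + pvIx counts j))
                id 0 := by
          show (if PySem.Int.band (pvIx states j) (pvIx mountains ((r : Int) + 1)) = 0 ∧
              PySem.Int.band (pvIx states k) (pvIx mountains ((r : Int) + 1 - 1)) = 0 ∧
              PySem.Int.band (pvIx states j) (pvIx states k) = 0 then _ else 0) = _
          rw [if_pos hguard]
        constructor
        · rw [h1, List.nil_append, hpv]
        · refine pvGood_insert states counts mountains _ h2 ((r : Int) + 1) j k _ (by omega) ?_
          rw [ht, h1, List.nil_append, hpv]
      · rw [if_neg hguard]
        have hpv0 : pvL states counts mountains (r + 1) j k = 0 := by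
          show (if PySem.Int.band (pvIx states j) (pvIx mountains ((r : Int) + 1)) = 0 ∧
              PySem.Int.band (pvIx states k) (pvIx mountains ((r : Int) + 1 - 1)) = 0 ∧
              PySem.Int.band (pvIx states j) (pvIx states k) = 0 then _ else 0) = 0
          rw [if_neg hguard]
        constructor
        · exact hpv0.symm
        · exact pvGood_insert states counts mountains memo hg ((r : Int) + 1) j k 0 (by omega)
            (by rw [ht, hpv0])

lemma pv_bvals_inner (states counts mountains : List Int) (rN : Nat) (j : Int) :
    ∀ (ks : List Int) (q0 : List Int × PySem.Dict (Int × Int × Int) Int),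
      pvGood states counts mountains q0.2 →
      ((ks.foldl (fun (q : List Int × PySem.Dict (Int × Int × Int) Int) k =>
          (q.1 ++ [(pvBest states counts mountains rN j k q.2).1],
            (pvBest states counts mountains rN j k q.2).2)) q0).1
        = q0.1 ++ ks.map (fun k => pvL states counts mountains rN j k))
      ∧ pvGood states counts mountains
          ((ks.foldl (fun (q : List Int × PySem.Dict (Int × Int × Int) Int) k =>
            (q.1 ++ [(pvBest states counts mountains rN j k q.2).1],
              (pvBest states counts mountains rN j k q.2).2)) q0).2) := by
  intro ks
  induction ks with
  | nil =>
    intro q0 hmm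
    exact ⟨by simp, hmm⟩
  | cons k0 ks ihk =>
    intro q0 hmm
    obtain ⟨hb1, hb2⟩ := pvBest_eq states counts mountains rN j k0 q0.2 hmm
    simp only [List.foldl_cons]
    obtain ⟨h1, h2⟩ := ihk (q0.1 ++ [(pvBest states counts mountains rN j k0 q0.2).1],
      (pvBest states counts mountains rN j k0 q0.2).2) hb2
    refine ⟨?_, h2⟩
    rw [h1]
    simp only [hb1, List.map_cons]
    simp [List.append_assoc]

lemma pv_bvals (states counts mountains : List Int) (rN : Nat) (ks : List Int) :
    ∀ (js : List Int) (q0 : List Int × PySem.Dict (Int × Int × Int) Int),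
      pvGood states counts mountains q0.2 →
      ((js.foldl (fun (q : List Int × PySem.Dict (Int × Int × Int) Int) j =>
          ks.foldl (fun (q : List Int × PySem.Dict (Int × Int × Int) Int) k =>
            (q.1 ++ [(pvBest states counts mountains rN j k q.2).1],
              (pvBest states counts mountains rN j k q.2).2)) q) q0).1
        = q0.1 ++ js.flatMap (fun j => ks.map (fun k => pvL states counts mountains rN j k)))
      ∧ pvGood states counts mountains
          ((js.foldl (fun (q : List Int × PySem.Dict (Int × Int × Int) Int) j =>
            ks.foldl (fun (q : List Int × PySem.Dict (Int × Int × Int) Int) k =>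
              (q.1 ++ [(pvBest states counts mountains rN j k q.2).1],
                (pvBest states counts mountains rN j k q.2).2)) q) q0).2) := by
  intro js
  induction js with
  | nil =>
    intro q0 hmm
    exact ⟨by simp, hmm⟩
  | cons j0 js ihj =>
    intro q0 hmm
    obtain ⟨h1, h2⟩ := pv_bvals_inner states counts mountains rN j0 ks q0 hmm
    simp only [List.foldl_cons]
    obtain ⟨h3, h4⟩ := ihj
      (ks.foldl (fun (q : List Int × PySem.Dict (Int × Int × Int) Int) k =>
        (q.1 ++ [(pvBest states counts mountains rN j0 k q.2).1],
          (pvBest states counts mountains rN j0 k q.2).2)) q0) h2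
    refine ⟨?_, h4⟩
    rw [h3, h1, List.flatMap_cons]
    simp [List.append_assoc]

-- ===== VERDICT (by name: the statement is the Claim_ definition above) =====
theorem solve_spec : Claim_equal_solve := by
  intro n m grid hdom hpre
  unfold Spec_solve
  by_cases h0 : n = 0 ∨ m = 0
  · simp only [solve, solve_alt, if_pos h0]
  · have hn : 0 < n := by
      rcases hpre with h | h | h
      · exact absurd (Or.inl h) h0
      · exact absurd (Or.inr h) h0
      · exact h.1
    have hm : 0 < m := by
      rcases hpre with h | h | h
      · exact absurd (Or.inl h) h0
      · exact absurd (Or.inr h) h0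
      · exact h.2.1
    simp only [solve, solve_alt, if_neg h0]
    set mountains := grid.foldl (fun acc row => acc ++ [pvMask m row]) ([] : List Int) with hmnt
    have hS : 0 < (pvStates m).1.length := pv_states_len_pos m hm
    have hScast : (0:Int) < PySem.List.len (pvStates m).1 := by
      rw [PySem.List.len_eq]; exact_mod_cast hS
    have hc : ∀ (j : Int), 0 ≤ pvIx (pvStates m).2 j := pv_counts_nonneg m
    obtain ⟨hq1, _⟩ := pv_bvals (pvStates m).1 (pvStates m).2 mountains (n - 1).toNat
      (PySem.List.pyRange 0 (PySem.List.len (pvStates m).1) 1)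
      (PySem.List.pyRange 0 (PySem.List.len (pvStates m).1) 1)
      (([], PySem.Dict.empty)) (pvGood_empty (pvStates m).1 (pvStates m).2 mountains)
    rw [hq1, List.nil_append]
    have hnn : ∀ x ∈ (PySem.List.pyRange 0 (PySem.List.len (pvStates m).1) 1).flatMap (fun j =>
        (PySem.List.pyRange 0 (PySem.List.len (pvStates m).1) 1).map (fun k =>
          pvL (pvStates m).1 (pvStates m).2 mountains (n - 1).toNat j k)), 0 ≤ x := by
      intro x hx
      simp only [List.mem_flatMap, List.mem_map] at hx
      obtain ⟨j, _, k, _, rfl⟩ := hx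
      exact pvL_nonneg (pvStates m).1 (pvStates m).2 mountains hc (n - 1).toNat j k
    have hne : (PySem.List.pyRange 0 (PySem.List.len (pvStates m).1) 1).flatMap (fun j =>
        (PySem.List.pyRange 0 (PySem.List.len (pvStates m).1) 1).map (fun k =>
          pvL (pvStates m).1 (pvStates m).2 mountains (n - 1).toNat j k)) ≠ [] := by
      rw [PySem.List.pyRange_one_cons hScast]
      simp [List.flatMap_cons]
    rw [pv_fold_max_eq _ hne hnn]
    have hcast : (n - 1).toNat = n.toNat - 1 := by omega
    rw [hcast]
    have hdp0 := pv_dp0 n (pvStates m).1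
    have hinv1 := pv_inv_base m hm mountains n.toNat (by omega) _ hdp0.1 hdp0.2
    by_cases h1 : 1 < n
    · rw [if_pos h1]
      have hinv2 := pv_inv_row1 m hm mountains n.toNat (by omega) _ hinv1
      have hinv3 := pv_mainfold m hm mountains n.toNat (n.toNat - 2) n (by omega) (by omega)
        _ hinv2
      rw [show n.toNat - 2 + 1 = n.toNat - 1 from by omega] at hinv3
      exact pv_ans m hm mountains n.toNat (n.toNat - 1) _ hinv3 (n - 1) (by omega)
    · rw [if_neg h1, PySem.List.pyRange_one_eq_nil (by omega : n ≤ 2), List.foldl_nil,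
        show n.toNat - 1 = 0 from by omega]
      exact pv_ans m hm mountains n.toNat 0 _ hinv1 (n - 1) (by omega)
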